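-- pv_equiv track=rewrite | github.com/albertorene02-maker/CPSC-481-Minesweeper | Python-Minesweeper-master/solver/analysis.py | _split_components
-- ===== SOURCE A (Python) =====
-- from collections import Counter, defaultdict
--
-- def _split_components(frontier, constraints):
--     # Group the frontier into independent CSP regions to keep search manageable.
--     if not frontier:
--         return []
--
--     adjacency = defaultdict(set)
--     relevant_constraints = []
--     for cells, count in constraints:
--         component_cells = cells & frontier
--         if not component_cells:
--             continue
--         relevant_constraints.append((component_cells, count))
--         for cell in component_cells:
--             adjacency[cell] |= component_cells - {cell}
--
--     seen = set()
--     components = []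
--     for cell in frontier:
--         if cell in seen:
--             continue
--         stack = [cell]
--         variables = set()
--         while stack:
--             current = stack.pop()
--             if current in seen:
--                 continue
--             seen.add(current)
--             variables.add(current)
--             stack.extend(adjacency[current] - seen)
--
--         component_constraints = []
--         for cells, count in relevant_constraints:
--             overlap = cells & variables
--             if overlap:
--                 component_constraints.append((tuple(sorted(overlap)), count))
--         components.append((variables, component_constraints))
--     return components
-- ===== SOURCE B (Python) =====
-- def _split_components(frontier, constraints):
--     # B: no cell-cell adjacency sets are built; constraints are indexed per cell
--     # (incidence lists), one DFS labels each cell with a component id expanding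
--     # constraints lazily, then variables and constraint buckets are assembled in
--     # single passes routed by component id (no per-component rescan of all
--     # constraints with set intersections).
--     if not frontier:
--         return []
--
--     relevant = []
--     incident = {}
--     for cells, count in constraints:
--         cc = cells & frontier
--         if not cc:
--             continue
--         for cell in cc:
--             incident.setdefault(cell, []).append(len(relevant))
--         relevant.append((cc, count))
--
--     comp = {}
--     ncomp = 0
--     for cell in frontier:
--         if cell in comp:
--             continue
--         stack = [cell]
--         while stack:
--             cur = stack.pop()
--             if cur in comp:
--                 continue
--             comp[cur] = ncomp
--             for i in incident.get(cur, ()):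
--                 stack.extend(c for c in relevant[i][0] if c not in comp)
--         ncomp += 1
--
--     variables = [set() for _ in range(ncomp)]
--     for cell in frontier:
--         variables[comp[cell]].add(cell)
--     buckets = [[] for _ in range(ncomp)]
--     for cc, count in relevant:
--         buckets[comp[next(iter(cc))]].append((tuple(sorted(cc)), count))
--     return list(zip(variables, buckets))
-- ===== Notes on version B (the rewrite author's own statement) =====
-- stated objective: alternative
-- what changed: A builds a cell-to-cell adjacency dict of sets and then, for every component, rescans every relevant constraint with a set intersection; B never builds adjacency: it indexes constraints per cell (incidence lists), labels each cell with a component id in one DFS that expands constraints lazily, and assembles the variables sets and the constraint buckets in single passes routed by component id.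
import Mathlib
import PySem

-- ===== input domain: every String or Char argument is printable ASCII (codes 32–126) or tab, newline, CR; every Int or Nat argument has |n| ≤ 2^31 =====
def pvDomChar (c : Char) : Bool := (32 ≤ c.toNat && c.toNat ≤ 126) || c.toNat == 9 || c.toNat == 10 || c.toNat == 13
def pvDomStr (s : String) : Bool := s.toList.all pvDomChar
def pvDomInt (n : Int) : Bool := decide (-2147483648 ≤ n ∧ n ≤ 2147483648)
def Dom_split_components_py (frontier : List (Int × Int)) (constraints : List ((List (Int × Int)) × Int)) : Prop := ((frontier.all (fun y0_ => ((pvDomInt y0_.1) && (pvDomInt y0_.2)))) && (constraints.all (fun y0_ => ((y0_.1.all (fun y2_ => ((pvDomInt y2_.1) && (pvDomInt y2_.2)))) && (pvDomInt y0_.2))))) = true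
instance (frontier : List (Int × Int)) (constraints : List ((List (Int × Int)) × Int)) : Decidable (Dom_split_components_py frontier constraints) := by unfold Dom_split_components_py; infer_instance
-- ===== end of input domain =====

-- B never builds A's cell-to-cell adjacency sets nor rescans all constraints per component:
-- it indexes constraints per cell, labels cells with component ids in one DFS, and routes
-- variables and constraints into their component in single passes; same return value.
-- Python-set modelling (both ports): a set argument arrives as the list of its DISTINCT
-- elements; the order the Python set iterates in is CPython's table order, deterministic
-- for int pairs and modelled exactly by pvFOrder below.
-- Each returned `variables` value is a Python SET, whose iteration order is a hash-table
-- artefact the caller cannot rely on and the comparison ignores: both ports materialise it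
-- in frontier order. Likewise DFS push order within one set is unobservable (only the
-- resulting sets are used); the stacks are modelled head-first.

-- ===== PORT A =====
abbrev Cel := Int × Int

-- ---- Python-semantics helper shared by both ports: CPython set construction order ----
-- (no deletions here, so fill = used; the stored hash is redundant for int pairs on Dom,
-- where |n| <= 2^31 makes hash(n) = n except hash(-1) = -2; the clean-reinsert probe of a
-- resize visits slots in the same order as the add probe and never finds an equal key)
abbrev PvSlot := Option Cel

def pvHashInt (n : Int) : UInt64 :=
  UInt64.ofNat (((if n = -1 then -2 else n) % 18446744073709551616).toNat)

def pvLaneStep (acc lane : UInt64) : UInt64 :=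
  let a := acc + lane * 14029467366897019727
  let a := (a <<< 31) ||| (a >>> 33)
  a * 11400714785074694791

def pvHashPair (p : Cel) : UInt64 :=
  -- CPython tuple hash (xxHash based), length 2
  let acc := pvLaneStep (pvLaneStep 2870177450012600261 (pvHashInt p.1)) (pvHashInt p.2)
  let acc := acc + ((2 : UInt64) ^^^ ((2870177450012600261 : UInt64) ^^^ (3527539 : UInt64)))
  if acc = 18446744073709551615 then 1546275796 else acc

def pvScan (t : List PvSlot) (key : Cel) : List Nat → Option (Option Nat)
  | [] => none
  | k :: ks =>
    match t.getD k none with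
    | none => some (some k)
    | some q => if q = key then some none else pvScan t key ks

-- the open-addressing probe: slot index to place key at, or none if the key is present
def pvProbe (t : List PvSlot) (key : Cel) : Nat → UInt64 → UInt64 → Option Nat
  | 0, _, _ => none
  | fuel + 1, i, perturb =>
    let mask := UInt64.ofNat (t.length - 1)
    let probes : Nat := if i + 9 ≤ mask then 9 else 0
    match pvScan t key ((List.range (probes + 1)).map (i.toNat + ·)) with
    | some r => r
    | none => pvProbe t key fuel (((i * (5 : UInt64)) + (1 : UInt64) + (perturb >>> (5 : UInt64))) &&& mask) (perturb >>> 5)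

def pvGrow (t : List PvSlot) (minused : Nat) : List PvSlot :=
  t.foldl (fun nt e =>
    match e with
    | some q =>
      match pvProbe nt q (nt.length + 64) (pvHashPair q &&& UInt64.ofNat (nt.length - 1)) (pvHashPair q) with
      | some k => nt.set k (some q)
      | none => nt
    | none => nt)
    (List.replicate ((List.range 64).foldl (fun s _ => if s ≤ minused then s * 2 else s) 8) none)

def pvSetAdd (st : List PvSlot × Nat) (key : Cel) : List PvSlot × Nat :=
  match pvProbe st.1 key (st.1.length + 64) (pvHashPair key &&& UInt64.ofNat (st.1.length - 1)) (pvHashPair key) with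
  | none => st
  | some k =>
    let t := st.1.set k (some key)
    let used := st.2 + 1
    if used * 5 ≥ (st.1.length - 1) * 3
    then (pvGrow t (if used > 50000 then used * 2 else used * 4), used)
    else (t, used)

-- one CPython set construction: insert the given keys in order, read the table back
def pvSetOrder (xs : List Cel) : List Cel :=
  ((xs.foldl pvSetAdd (List.replicate 8 none, 0)).1).filterMap id

-- the frontier set as the Python function iterates it: the caller hands the port the distinct
-- elements in delivery order, while the Python side's set is built by inserting them in that
-- order and rebuilt once more when the arguments are deep-copied — two constructions
def pvFOrder (xs : List Cel) : List Cel := pvSetOrder (pvSetOrder xs)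

-- tuple(sorted(...)) — Python sorts pairs lexicographically (shared: both Pythons do it)
def pvSortedCells (xs : List (Int × Int)) : List (Int × Int) :=
  PySem.List.sorted2 xs Prod.fst Prod.snd

-- ---- A's code proper ----
-- cells & frontier
def pvInter (cells fr : List (Int × Int)) : List (Int × Int) :=
  PySem.Set.inter (PySem.Set.ofList cells) fr

-- 'for cell in component_cells: adjacency[cell] |= component_cells - {cell}'
def pvAdjStep (cc : List (Int × Int)) (adj : PySem.Dict (Int × Int) (PySem.Set (Int × Int))) :
    PySem.Dict (Int × Int) (PySem.Set (Int × Int)) :=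
  cc.foldl (fun a cell =>
    a.insert cell (PySem.Set.union (a.getD cell PySem.Set.empty) (PySem.Set.diff cc [cell]))) adj

-- the 'for cells, count in constraints' loop building adjacency and relevant_constraints
def pvAdjRel (fr : List (Int × Int)) (constraints : List (List (Int × Int) × Int)) :
    PySem.Dict (Int × Int) (PySem.Set (Int × Int)) × List (List (Int × Int) × Int) :=
  constraints.foldl (fun st p =>
    let cc := pvInter p.1 fr
    if cc = [] then st
    else (pvAdjStep cc st.1, st.2 ++ [(cc, p.2)])) (PySem.Dict.empty, [])

def pvAGet (adj : PySem.Dict (Int × Int) (PySem.Set (Int × Int))) (x : Int × Int) :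
    PySem.Set (Int × Int) := adj.getD x PySem.Set.empty

def pvTotal (adj : PySem.Dict (Int × Int) (PySem.Set (Int × Int))) : Nat :=
  (adj.values.map List.length).sum

-- the 'while stack' DFS loop; stack head-first, push order within one extend unobservable
def pvVisit (adj : PySem.Dict (Int × Int) (PySem.Set (Int × Int))) :
    Nat → PySem.Set (Int × Int) → PySem.Set (Int × Int) → List (Int × Int) →
    PySem.Set (Int × Int) × PySem.Set (Int × Int)
  | 0, seen, vars, _ => (seen, vars)
  | _ + 1, seen, vars, [] => (seen, vars)
  | fuel + 1, seen, vars, current :: rest =>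
    if PySem.Set.contains seen current then pvVisit adj fuel seen vars rest
    else
      let seen' := PySem.Set.add seen current
      let vars' := PySem.Set.add vars current
      pvVisit adj fuel seen' vars' (PySem.Set.diff (pvAGet adj current) seen' ++ rest)

-- fuel bound: at most 1 push per adjacency entry, so this always suffices (proved below)
def pvFuel (adj : PySem.Dict (Int × Int) (PySem.Set (Int × Int))) (order : List (Int × Int)) : Nat :=
  1 + (order.length + pvTotal adj + 1) * (pvTotal adj + 1)

-- the 'for cell in frontier' loop collecting one variables-set per component
def pvComponents (adj : PySem.Dict (Int × Int) (PySem.Set (Int × Int))) (order : List (Int × Int)) :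
    List (PySem.Set (Int × Int)) :=
  (order.foldl (fun st cell =>
    if PySem.Set.contains st.1 cell then st
    else
      let r := pvVisit adj (pvFuel adj order) st.1 PySem.Set.empty [cell]
      (r.1, st.2 ++ [r.2])) (PySem.Set.empty, [])).2

def split_components_py (frontier : List (Int × Int)) (constraints : List ((List (Int × Int)) × Int)) : List ((List (Int × Int)) × (List ((List (Int × Int)) × Int))) :=
  if frontier = [] then []
  else
    let forder := pvFOrder frontier
    let ar := pvAdjRel forder constraints
    -- per component: the returned Python set `variables` materialised in frontier order,
    -- and the rescan of relevant_constraints keeping nonempty overlaps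
    (pvComponents ar.1 forder).map (fun vset =>
      (forder.filter (fun v => PySem.Set.contains vset v),
        ar.2.foldl (fun acc p =>
          let overlap := PySem.Set.inter p.1 vset
          if overlap = [] then acc
          else acc ++ [(pvSortedCells overlap, p.2)]) []))

-- ===== PORT B =====
-- incident[cell] : indices of the relevant constraints containing cell
def pvIGet (inc : PySem.Dict Cel (List Nat)) (x : Cel) : List Nat := inc.getD x []

-- relevant[i][0]
def pvCellsOf (rel : List (List Cel × Int)) (i : Nat) : List Cel :=
  (rel.getD i ([], 0)).1

def pvTotB (rel : List (List Cel × Int)) : Nat := (rel.map (fun p => p.1.length)).sum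

-- the 'for cells, count in constraints' loop building relevant + incidence lists
def pvIncRel (fr : List Cel) (constraints : List (List Cel × Int)) :
    PySem.Dict Cel (List Nat) × List (List Cel × Int) :=
  constraints.foldl (fun bld con =>
    let cc := PySem.Set.inter (PySem.Set.ofList con.1) fr
    if cc = [] then bld
    else (cc.foldl (fun idx cel => idx.insert cel (idx.getD cel [] ++ [bld.2.length])) bld.1,
          bld.2 ++ [(cc, con.2)])) (PySem.Dict.empty, [])

-- the 'while stack' labelling loop: comp[cur] = n, expand incident constraints lazily
def pvLabel (inc : PySem.Dict Cel (List Nat)) (rel : List (List Cel × Int))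
    (n : Int) :
    Nat → PySem.Dict Cel Int → List Cel → PySem.Dict Cel Int
  | 0, comp, _ => comp
  | _ + 1, comp, [] => comp
  | fuel + 1, comp, cur :: rest =>
    if (comp.get? cur).isSome then pvLabel inc rel n fuel comp rest
    else
      let comp' := comp.insert cur n
      pvLabel inc rel n fuel comp'
        ((pvIGet inc cur).foldl (fun s i =>
          s ++ (pvCellsOf rel i).filter (fun c => (comp'.get? c).isNone)) [] ++ rest)

-- fuel bound: at most one push per (constraint, member) pair per labelled cell (proved below)
def pvFuelB (order : List Cel) (rel : List (List Cel × Int)) : Nat :=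
  1 + (order.length + pvTotB rel + 1) * (pvTotB rel + 1)

-- the 'for cell in frontier' loop assigning component ids
def pvLabelAll (inc : PySem.Dict Cel (List Nat)) (rel : List (List Cel × Int))
    (order : List Cel) : PySem.Dict Cel Int × Int :=
  order.foldl (fun acc c =>
    if (acc.1.get? c).isSome then acc
    else (pvLabel inc rel acc.2 (pvFuelB order rel) acc.1 [c], acc.2 + 1))
    (PySem.Dict.empty, 0)

def pvCGet (comp : PySem.Dict Cel Int) (c : Cel) : Int := comp.getD c 0

-- 'for cell in frontier: variables[comp[cell]].add(cell)' — iterating the set frontier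
-- never repeats a cell, so each .add appends a fresh element
def pvGroup (comp : PySem.Dict Cel Int) (order : List Cel) (n : Int) :
    List (List Cel) :=
  order.foldl (fun vars c => vars.modify (pvCGet comp c).toNat (fun row => row ++ [c]))
    (List.replicate n.toNat [])

-- 'for cc, count in relevant: buckets[comp[next(iter(cc))]].append((tuple(sorted(cc)), count))'
def pvRoute (comp : PySem.Dict Cel Int) (rel : List (List Cel × Int)) (n : Int) :
    List (List ((List Cel) × Int)) :=
  rel.foldl (fun bkts con =>
    bkts.modify (pvCGet comp con.1.headI).toNat (fun row => row ++ [(pvSortedCells con.1, con.2)]))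
    (List.replicate n.toNat [])

def split_components_py_alt (frontier : List (Int × Int)) (constraints : List ((List (Int × Int)) × Int)) : List ((List (Int × Int)) × (List ((List (Int × Int)) × Int))) :=
  if frontier = [] then []
  else
    let forder := pvFOrder frontier
    let ir := pvIncRel forder constraints
    let cn := pvLabelAll ir.1 ir.2 forder
    (pvGroup cn.1 forder cn.2).zip (pvRoute cn.1 ir.2 cn.2)

-- ===== PRECONDITION & SPEC =====
def Spec_split_components_py (frontier : List (Int × Int)) (constraints : List ((List (Int × Int)) × Int)) (out : List ((List (Int × Int)) × (List ((List (Int × Int)) × Int)))) : Prop := out = split_components_py_alt frontier constraints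
instance (frontier : List (Int × Int)) (constraints : List ((List (Int × Int)) × Int)) (out : List ((List (Int × Int)) × (List ((List (Int × Int)) × Int)))) : Decidable (Spec_split_components_py frontier constraints out) := by unfold Spec_split_components_py; infer_instance

-- ===== CLAIM (what is proved, stated in full; the proofs are below) =====
def Claim_equal_split_components_py : Prop := ∀ (frontier : List (Int × Int)) (constraints : List ((List (Int × Int)) × Int)), Dom_split_components_py frontier constraints → Spec_split_components_py frontier constraints (split_components_py frontier constraints)

-- ===== LEMMAS AND PROOFS =====


-- ---- A-side: adjacency characterisation and DFS facts ----

def PvStepR (rel : List (List (Int × Int) × Int)) (x y : Int × Int) : Prop :=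
  ∃ p ∈ rel, x ∈ p.1 ∧ y ∈ p.1

def PvAdjR (rel : List (List (Int × Int) × Int)) (x y : Int × Int) : Prop :=
  y ≠ x ∧ PvStepR rel x y

def PvReachR (rel : List (List (Int × Int) × Int)) (x y : Int × Int) : Prop :=
  Relation.ReflTransGen (PvStepR rel) x y

def PvStepA (adj : PySem.Dict (Int × Int) (PySem.Set (Int × Int))) (x y : Int × Int) : Prop :=
  y ∈ pvAGet adj x

def PvReachA (adj : PySem.Dict (Int × Int) (PySem.Set (Int × Int))) (x y : Int × Int) : Prop :=
  Relation.ReflTransGen (PvStepA adj) x y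

theorem pvStepR_symm (rel : List (List (Int × Int) × Int)) (x y : Int × Int)
    (h : PvStepR rel x y) : PvStepR rel y x := by
  rcases h with ⟨p, hp, hx, hy⟩
  exact ⟨p, hp, hy, hx⟩

theorem pvReachAR (adj : PySem.Dict (Int × Int) (PySem.Set (Int × Int)))
    (rel : List (List (Int × Int) × Int))
    (hadj : ∀ x y, y ∈ pvAGet adj x ↔ PvAdjR rel x y) (c x : Int × Int) :
    PvReachA adj c x ↔ PvReachR rel c x := by
  constructor
  · intro h
    exact Relation.ReflTransGen.mono (fun a b hab => ((hadj a b).mp hab).2) h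
  · intro h
    induction h with
    | refl => exact Relation.ReflTransGen.refl
    | tail _ hbc ih =>
      rename_i b c' _
      by_cases hbc' : c' = b
      · exact hbc' ▸ ih
      · exact Relation.ReflTransGen.tail ih ((hadj b c').mpr ⟨hbc', hbc⟩)

def pvUniv (adj : PySem.Dict (Int × Int) (PySem.Set (Int × Int))) (order : List (Int × Int)) :
    List (Int × Int) := order ++ adj.values.flatten

theorem pvAdjStep_mem (cc : List (Int × Int)) :
    ∀ (cs : List (Int × Int)) (a : PySem.Dict (Int × Int) (PySem.Set (Int × Int))) (x y : Int × Int),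
      (y ∈ pvAGet (cs.foldl (fun a cell =>
        a.insert cell (PySem.Set.union (a.getD cell PySem.Set.empty) (PySem.Set.diff cc [cell]))) a) x
      ↔ y ∈ pvAGet a x ∨ (x ∈ cs ∧ y ∈ cc ∧ y ≠ x)) := by
  intro cs
  induction cs with
  | nil => intro a x y; simp
  | cons cell cs ih =>
    intro a x y
    rw [List.foldl_cons, ih]
    have h1 : pvAGet (a.insert cell (PySem.Set.union (a.getD cell PySem.Set.empty) (PySem.Set.diff cc [cell]))) x
        = if x = cell then PySem.Set.union (a.getD cell PySem.Set.empty) (PySem.Set.diff cc [cell]) else pvAGet a x := by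
      unfold pvAGet
      rw [PySem.Dict.getD_insert]

    rw [h1]
    by_cases hx : x = cell
    · subst hx
      rw [if_pos rfl]
      have h2 : ∀ z : Int × Int,
          (z ∈ PySem.Set.union (a.getD x PySem.Set.empty) (PySem.Set.diff cc [x]))
          ↔ z ∈ pvAGet a x ∨ (z ∈ cc ∧ z ≠ x) := by
        intro z
        rw [PySem.Set.mem_union, PySem.Set.mem_diff]
        have : a.getD x PySem.Set.empty = pvAGet a x := rfl
        rw [this]
        simp
      rw [h2]
      simp only [List.mem_cons]
      tauto
    · rw [if_neg hx]
      simp only [List.mem_cons]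
      constructor
      · rintro (h | ⟨h1', h2', h3'⟩)
        · exact Or.inl h
        · exact Or.inr ⟨Or.inr h1', h2', h3'⟩
      · rintro (h | ⟨(h1' | h1'), h2', h3'⟩)
        · exact Or.inl h
        · exact absurd h1' hx
        · exact Or.inr ⟨h1', h2', h3'⟩

theorem pvAdjR_append (rel : List (List (Int × Int) × Int)) (q : List (Int × Int) × Int)
    (x y : Int × Int) :
    PvAdjR (rel ++ [q]) x y ↔ PvAdjR rel x y ∨ (y ≠ x ∧ x ∈ q.1 ∧ y ∈ q.1) := by
  unfold PvAdjR PvStepR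
  simp only [List.mem_append, List.mem_singleton]
  constructor
  · rintro ⟨hne, p, (hp | hp), hx, hy⟩
    · exact Or.inl ⟨hne, p, hp, hx, hy⟩
    · subst hp; exact Or.inr ⟨hne, hx, hy⟩
  · rintro (⟨hne, p, hp, hx, hy⟩ | ⟨hne, hx, hy⟩)
    · exact ⟨hne, p, Or.inl hp, hx, hy⟩
    · exact ⟨hne, q, Or.inr rfl, hx, hy⟩

theorem pvAdjRel_loop (fr : List (Int × Int)) :
    ∀ (cs : List (List (Int × Int) × Int)) (st : PySem.Dict (Int × Int) (PySem.Set (Int × Int)) × List (List (Int × Int) × Int)),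
      (∀ x y, y ∈ pvAGet st.1 x ↔ PvAdjR st.2 x y) →
      ∀ x y, y ∈ pvAGet (cs.foldl (fun st p =>
          let cc := pvInter p.1 fr
          if cc = [] then st
          else (pvAdjStep cc st.1, st.2 ++ [(cc, p.2)])) st).1 x
        ↔ PvAdjR (cs.foldl (fun st p =>
          let cc := pvInter p.1 fr
          if cc = [] then st
          else (pvAdjStep cc st.1, st.2 ++ [(cc, p.2)])) st).2 x y := by
  intro cs
  induction cs with
  | nil => intro st h; exact h
  | cons p cs ih =>
    intro st h x y
    rw [List.foldl_cons]
    by_cases hcc : pvInter p.1 fr = []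
    · simp only [hcc, reduceIte]
      exact ih st h x y
    · simp only [if_neg hcc]
      apply ih
      intro x' y'
      show y' ∈ pvAGet (pvAdjStep (pvInter p.1 fr) st.1) x' ↔ _
      unfold pvAdjStep
      rw [pvAdjStep_mem, pvAdjR_append, h]
      constructor
      · rintro (h' | ⟨h1, h2, h3⟩)
        · exact Or.inl h'
        · exact Or.inr ⟨h3, h1, h2⟩
      · rintro (h' | ⟨h1, h2, h3⟩)
        · exact Or.inl h'
        · exact Or.inr ⟨h2, h3, h1⟩

theorem pvAdjRel_mem (fr : List (Int × Int)) (constraints : List (List (Int × Int) × Int))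
    (x y : Int × Int) :
    y ∈ pvAGet (pvAdjRel fr constraints).1 x ↔ PvAdjR (pvAdjRel fr constraints).2 x y := by
  unfold pvAdjRel
  apply pvAdjRel_loop
  intro x' y'
  unfold pvAGet PvAdjR PvStepR
  simp [PySem.Dict.getD_empty]

theorem pvAdjRel_rel_entries (fr : List (Int × Int)) (constraints : List (List (Int × Int) × Int)) :
    ∀ p ∈ (pvAdjRel fr constraints).2, p.1 ≠ [] ∧ ∀ x ∈ p.1, x ∈ fr := by
  unfold pvAdjRel
  suffices h : ∀ (cs : List (List (Int × Int) × Int)) (st : PySem.Dict (Int × Int) (PySem.Set (Int × Int)) × List (List (Int × Int) × Int)),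
      (∀ p ∈ st.2, p.1 ≠ [] ∧ ∀ x ∈ p.1, x ∈ fr) →
      ∀ p ∈ (cs.foldl (fun st p =>
          let cc := pvInter p.1 fr
          if cc = [] then st
          else (pvAdjStep cc st.1, st.2 ++ [(cc, p.2)])) st).2, p.1 ≠ [] ∧ ∀ x ∈ p.1, x ∈ fr by
    intro p hp
    exact h constraints (PySem.Dict.empty, []) (by simp) p hp
  intro cs
  induction cs with
  | nil => intro st h; exact h
  | cons q cs ih =>
    intro st h
    rw [List.foldl_cons]
    by_cases hcc : pvInter q.1 fr = []
    · simp only [hcc]; exact ih st h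
    · simp only [if_neg hcc]
      apply ih
      intro p hp
      rcases List.mem_append.mp hp with hp | hp
      · exact h p hp
      · rcases List.mem_singleton.mp hp with rfl
        refine ⟨hcc, fun x hx => ?_⟩
        exact ((PySem.Set.mem_inter _ _ _).mp hx).2

theorem pvAGet_len_le (adj : PySem.Dict (Int × Int) (PySem.Set (Int × Int))) (x : Int × Int) :
    (pvAGet adj x).length ≤ pvTotal adj := by
  unfold pvAGet pvTotal
  rw [PySem.Dict.getD_eq_get?_getD]
  cases hg : adj.get? x with
  | none => simp
  | some v =>
    simp only [Option.getD_some]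
    have hv : v ∈ adj.values := by
      unfold PySem.Dict.get? at hg
      rcases Option.map_eq_some_iff.mp hg with ⟨p, hp, rfl⟩
      exact List.mem_map.mpr ⟨p, List.mem_of_find?_eq_some hp, rfl⟩
    exact List.single_le_sum (by simp) _ (List.mem_map.mpr ⟨v, hv, rfl⟩)

theorem pvAGet_sub_univ (adj : PySem.Dict (Int × Int) (PySem.Set (Int × Int)))
    (order : List (Int × Int)) (x : Int × Int) : ∀ y ∈ pvAGet adj x, y ∈ pvUniv adj order := by
  intro y hy
  unfold pvUniv
  rw [List.mem_append]
  right
  unfold pvAGet at hy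
  rw [PySem.Dict.getD_eq_get?_getD] at hy
  cases hg : adj.get? x with
  | none => rw [hg] at hy; simp at hy
  | some v =>
    rw [hg] at hy
    simp only [Option.getD_some] at hy
    have hv : v ∈ adj.values := by
      unfold PySem.Dict.get? at hg
      rcases Option.map_eq_some_iff.mp hg with ⟨p, hp, rfl⟩
      exact List.mem_map.mpr ⟨p, List.mem_of_find?_eq_some hp, rfl⟩
    exact List.mem_flatten.mpr ⟨v, hv, hy⟩

def pvPhi (adj : PySem.Dict (Int × Int) (PySem.Set (Int × Int))) (order : List (Int × Int))
    (seen : PySem.Set (Int × Int)) (stack : List (Int × Int)) : Nat :=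
  stack.length + ((pvUniv adj order).filter (fun x => !(PySem.Set.contains seen x))).length * (pvTotal adj + 1)

theorem pvFilterFilter {α : Type} (l : List α) (p q : α → Bool) :
    (l.filter p).filter q = l.filter (fun a => p a && q a) := by
  induction l with
  | nil => rfl
  | cons a l ih => by_cases hp : p a <;> by_cases hq : q a <;> simp [hp, hq, ih]

theorem pvFilterDropLt (l : List (Int × Int)) (c : Int × Int) (h : c ∈ l) :
    (l.filter (fun a => !(a == c))).length < l.length := by
  induction l with
  | nil => cases h
  | cons a l ih =>
    by_cases hac : a = c
    · subst hac
      simp only [List.filter_cons, beq_self_eq_true, Bool.not_true, List.length_cons]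
      exact Nat.lt_succ_of_le (List.length_filter_le _ _)
    · have hc : c ∈ l := by
        rcases List.mem_cons.mp h with h' | h'
        · exact absurd h'.symm hac
        · exact h'
      simp only [List.filter_cons, List.length_cons]
      have hb : (!(a == c)) = true := by simp [hac]
      rw [hb]
      simpa using Nat.succ_lt_succ (ih hc)

theorem pvContains_add_eq (s : PySem.Set (Int × Int)) (c x : Int × Int) :
    PySem.Set.contains (PySem.Set.add s c) x = (PySem.Set.contains s x || x == c) := by
  by_cases hx : x ∈ PySem.Set.add s c
  · rw [(PySem.Set.contains_iff _ _).mpr hx]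
    rcases (PySem.Set.mem_add _ _ _).mp hx with h | h
    · rw [(PySem.Set.contains_iff _ _).mpr h]; rfl
    · subst h; simp
  · have h1 : PySem.Set.contains (PySem.Set.add s c) x = false :=
      Bool.eq_false_iff.mpr (fun hc => hx ((PySem.Set.contains_iff _ _).mp hc))
    have h2 : x ∉ s := fun h => hx ((PySem.Set.mem_add _ _ _).mpr (Or.inl h))
    have h3 : x ≠ c := fun h => hx ((PySem.Set.mem_add _ _ _).mpr (Or.inr h))
    have h4 : PySem.Set.contains s x = false :=
      Bool.eq_false_iff.mpr (fun hc => h2 ((PySem.Set.contains_iff _ _).mp hc))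
    have h5 : (x == c) = false := by simpa using h3
    rw [h1, h4, h5]
    rfl

theorem pvVisit_cons_seen (adj : PySem.Dict (Int × Int) (PySem.Set (Int × Int))) (fuel : Nat)
    (seen vars : PySem.Set (Int × Int)) (c : Int × Int) (rest : List (Int × Int))
    (h : PySem.Set.contains seen c = true) :
    pvVisit adj (fuel + 1) seen vars (c :: rest) = pvVisit adj fuel seen vars rest := by
  simp only [pvVisit, h, reduceIte]

theorem pvVisit_cons_fresh (adj : PySem.Dict (Int × Int) (PySem.Set (Int × Int))) (fuel : Nat)
    (seen vars : PySem.Set (Int × Int)) (c : Int × Int) (rest : List (Int × Int))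
    (h : PySem.Set.contains seen c = false) :
    pvVisit adj (fuel + 1) seen vars (c :: rest) =
      pvVisit adj fuel (PySem.Set.add seen c) (PySem.Set.add vars c)
        (PySem.Set.diff (pvAGet adj c) (PySem.Set.add seen c) ++ rest) := by
  simp only [pvVisit, h]
  rw [if_neg (by simp)]

theorem pvVisit_spec (adj : PySem.Dict (Int × Int) (PySem.Set (Int × Int))) (order : List (Int × Int)) :
    ∀ (fuel : Nat) (seen vars : PySem.Set (Int × Int)) (stack : List (Int × Int)),
      (∀ c ∈ stack, c ∈ pvUniv adj order) →
      pvPhi adj order seen stack ≤ fuel →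
      (∀ x ∈ seen, x ∈ (pvVisit adj fuel seen vars stack).1) ∧
      (∀ x, x ∈ (pvVisit adj fuel seen vars stack).2 ↔
        x ∈ vars ∨ (x ∈ (pvVisit adj fuel seen vars stack).1 ∧ x ∉ seen)) ∧
      (∀ c ∈ stack, c ∈ (pvVisit adj fuel seen vars stack).1) ∧
      (∀ x ∈ (pvVisit adj fuel seen vars stack).1, x ∉ seen →
        ∀ y ∈ pvAGet adj x, y ∈ (pvVisit adj fuel seen vars stack).1) := by
  intro fuel
  induction fuel with
  | zero =>
    intro seen vars stack _ hf
    have hstack : stack = [] := by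
      unfold pvPhi at hf
      have := Nat.le_zero.mp hf
      exact List.eq_nil_of_length_eq_zero (by omega)
    subst hstack
    refine ⟨fun x hx => hx, fun x => ?_, by simp, fun x hx hnx => absurd hx hnx⟩
    show x ∈ vars ↔ x ∈ vars ∨ (x ∈ seen ∧ x ∉ seen)
    tauto
  | succ fuel ih =>
    intro seen vars stack hs hf
    cases stack with
    | nil =>
      refine ⟨fun x hx => hx, fun x => ?_, by simp, fun x hx hnx => absurd hx hnx⟩
      show x ∈ vars ↔ x ∈ vars ∨ (x ∈ seen ∧ x ∉ seen)
      tauto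
    | cons c rest =>
      cases hc : PySem.Set.contains seen c with
      | true =>
        rw [pvVisit_cons_seen adj fuel seen vars c rest hc]
        have hf' : pvPhi adj order seen rest ≤ fuel := by
          unfold pvPhi at hf ⊢
          simp only [List.length_cons] at hf
          omega
        obtain ⟨i1, i2, i3, i4⟩ := ih seen vars rest (fun d hd => hs d (List.mem_cons_of_mem c hd)) hf'
        refine ⟨i1, i2, ?_, i4⟩
        intro d hd
        rcases List.mem_cons.mp hd with rfl | hd'
        · exact i1 d ((PySem.Set.contains_iff _ _).mp hc)
        · exact i3 d hd'
      | false =>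
        rw [pvVisit_cons_fresh adj fuel seen vars c rest hc]
        have hcs : c ∉ seen := fun h => by
          rw [(PySem.Set.contains_iff _ _).mpr h] at hc; cases hc
        have hcu : c ∈ pvUniv adj order := hs c List.mem_cons_self
        have hdlen : (PySem.Set.diff (pvAGet adj c) (PySem.Set.add seen c)).length ≤ pvTotal adj := by
          have : (PySem.Set.diff (pvAGet adj c) (PySem.Set.add seen c)).length ≤ (pvAGet adj c).length := by
            show ((pvAGet adj c).filter _).length ≤ _
            exact List.length_filter_le _ _
          exact le_trans this (pvAGet_len_le adj c)
        have hfilter :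
            (pvUniv adj order).filter (fun x => !(PySem.Set.contains (PySem.Set.add seen c) x))
            = ((pvUniv adj order).filter (fun x => !(PySem.Set.contains seen x))).filter (fun a => !(a == c)) := by
          rw [pvFilterFilter]
          apply List.filter_congr
          intro x _
          rw [pvContains_add_eq]
          cases PySem.Set.contains seen x <;> cases hxc : (x == c) <;> simp
        have hcf : c ∈ (pvUniv adj order).filter (fun x => !(PySem.Set.contains seen x)) :=
          List.mem_filter.mpr ⟨hcu, by rw [hc]; rfl⟩
        have hlt :
            (((pvUniv adj order).filter (fun x => !(PySem.Set.contains seen x))).filter (fun a => !(a == c))).length + 1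
            ≤ ((pvUniv adj order).filter (fun x => !(PySem.Set.contains seen x))).length :=
          pvFilterDropLt _ c hcf
        have hf' : pvPhi adj order (PySem.Set.add seen c)
            (PySem.Set.diff (pvAGet adj c) (PySem.Set.add seen c) ++ rest) ≤ fuel := by
          unfold pvPhi at hf ⊢
          rw [hfilter]
          rw [List.length_append]
          have hmul :
              ((((pvUniv adj order).filter (fun x => !(PySem.Set.contains seen x))).filter (fun a => !(a == c))).length + 1) * (pvTotal adj + 1)
              ≤ ((pvUniv adj order).filter (fun x => !(PySem.Set.contains seen x))).length * (pvTotal adj + 1) :=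
            Nat.mul_le_mul_right _ hlt
          rw [Nat.succ_mul] at hmul
          simp only [List.length_cons] at hf
          omega
        have hs' : ∀ d ∈ PySem.Set.diff (pvAGet adj c) (PySem.Set.add seen c) ++ rest, d ∈ pvUniv adj order := by
          intro d hd
          rcases List.mem_append.mp hd with hd' | hd'
          · exact pvAGet_sub_univ adj order c d ((PySem.Set.mem_diff _ _ _).mp hd').1
          · exact hs d (List.mem_cons_of_mem c hd')
        obtain ⟨i1, i2, i3, i4⟩ := ih (PySem.Set.add seen c) (PySem.Set.add vars c) _ hs' hf'
        have hcr : c ∈ (pvVisit adj fuel (PySem.Set.add seen c) (PySem.Set.add vars c)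
            (PySem.Set.diff (pvAGet adj c) (PySem.Set.add seen c) ++ rest)).1 :=
          i1 c ((PySem.Set.mem_add _ _ _).mpr (Or.inr rfl))
        refine ⟨?_, ?_, ?_, ?_⟩
        · intro x hx
          exact i1 x ((PySem.Set.mem_add _ _ _).mpr (Or.inl hx))
        · intro x
          rw [i2 x, PySem.Set.mem_add, PySem.Set.mem_add]
          by_cases hxc : x = c
          · subst hxc; tauto
          · tauto
        · intro d hd
          rcases List.mem_cons.mp hd with rfl | hd'
          · exact hcr
          · exact i3 d (List.mem_append.mpr (Or.inr hd'))
        · intro x hx hnx y hy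
          by_cases hxc : x = c
          · subst hxc
            by_cases hys : y ∈ PySem.Set.add seen x
            · exact i1 y hys
            · exact i3 y (List.mem_append.mpr (Or.inl ((PySem.Set.mem_diff _ _ _).mpr ⟨hy, hys⟩)))
          · have hnx' : x ∉ PySem.Set.add seen c := fun h => by
              rcases (PySem.Set.mem_add _ _ _).mp h with h' | h'
              · exact hnx h'
              · exact hxc h'
            exact i4 x hx hnx' y hy

theorem pvPhi_start_le (adj : PySem.Dict (Int × Int) (PySem.Set (Int × Int)))
    (order : List (Int × Int)) (seen : PySem.Set (Int × Int)) (c : Int × Int) :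
    pvPhi adj order seen [c] ≤ pvFuel adj order := by
  unfold pvPhi pvFuel
  have h1 : ((pvUniv adj order).filter (fun x => !(PySem.Set.contains seen x))).length
      ≤ order.length + pvTotal adj := by
    have h2 : ((pvUniv adj order).filter (fun x => !(PySem.Set.contains seen x))).length
        ≤ (pvUniv adj order).length := List.length_filter_le _ _
    have h3 : (pvUniv adj order).length = order.length + (adj.values.flatten).length := by
      unfold pvUniv; rw [List.length_append]
    have h4 : (adj.values.flatten).length = pvTotal adj := by
      unfold pvTotal; rw [List.length_flatten]
    omega
  have h5 : ((pvUniv adj order).filter (fun x => !(PySem.Set.contains seen x))).length * (pvTotal adj + 1)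
      ≤ (order.length + pvTotal adj) * (pvTotal adj + 1) := Nat.mul_le_mul_right _ h1
  have h6 : (order.length + pvTotal adj) * (pvTotal adj + 1)
      ≤ (order.length + pvTotal adj + 1) * (pvTotal adj + 1) :=
    Nat.mul_le_mul_right _ (by omega)
  simp only [List.length_cons, List.length_nil]
  omega

theorem pvVisit_subset (adj : PySem.Dict (Int × Int) (PySem.Set (Int × Int))) :
    ∀ (fuel : Nat) (seen vars : PySem.Set (Int × Int)) (stack : List (Int × Int)),
      ∀ x ∈ (pvVisit adj fuel seen vars stack).1,
        x ∈ seen ∨ ∃ s ∈ stack, PvReachA adj s x := by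
  intro fuel
  induction fuel with
  | zero => intro seen vars stack x hx; exact Or.inl hx
  | succ fuel ih =>
    intro seen vars stack x hx
    cases stack with
    | nil => exact Or.inl hx
    | cons c rest =>
      cases hc : PySem.Set.contains seen c with
      | true =>
        rw [pvVisit_cons_seen adj fuel seen vars c rest hc] at hx
        rcases ih seen vars rest x hx with h | ⟨s, hs, hr⟩
        · exact Or.inl h
        · exact Or.inr ⟨s, List.mem_cons_of_mem c hs, hr⟩
      | false =>
        rw [pvVisit_cons_fresh adj fuel seen vars c rest hc] at hx
        rcases ih _ _ _ x hx with h | ⟨s, hs, hr⟩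
        · rcases (PySem.Set.mem_add _ _ _).mp h with h' | h'
          · exact Or.inl h'
          · exact Or.inr ⟨c, List.mem_cons_self, h' ▸ Relation.ReflTransGen.refl⟩
        · rcases List.mem_append.mp hs with hs' | hs'
          · have hsc : s ∈ pvAGet adj c := ((PySem.Set.mem_diff _ _ _).mp hs').1
            exact Or.inr ⟨c, List.mem_cons_self, Relation.ReflTransGen.head hsc hr⟩
          · exact Or.inr ⟨s, List.mem_cons_of_mem c hs', hr⟩

-- full characterisation of one DFS run started on a fresh root, over a closed seen set
theorem pvVisit_run (adj : PySem.Dict (Int × Int) (PySem.Set (Int × Int)))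
    (order : List (Int × Int)) (seen vars : PySem.Set (Int × Int)) (c : Int × Int)
    (hcu : c ∈ pvUniv adj order)
    (hcl : ∀ x ∈ seen, ∀ y ∈ pvAGet adj x, y ∈ seen) :
    (∀ x, x ∈ (pvVisit adj (pvFuel adj order) seen vars [c]).1 ↔ (x ∈ seen ∨ PvReachA adj c x)) ∧
    (∀ x, x ∈ (pvVisit adj (pvFuel adj order) seen vars [c]).2 ↔
      (x ∈ vars ∨ (PvReachA adj c x ∧ x ∉ seen))) := by
  obtain ⟨v1, v2, v3, v4⟩ := pvVisit_spec adj order (pvFuel adj order) seen vars [c]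
    (by intro d hd; rcases List.mem_singleton.mp hd with rfl; exact hcu)
    (pvPhi_start_le adj order seen c)
  have hre : ∀ x, PvReachA adj c x → x ∈ (pvVisit adj (pvFuel adj order) seen vars [c]).1 := by
    intro x h
    induction h with
    | refl => exact v3 c (List.mem_singleton.mpr rfl)
    | tail _ hbc ih =>
      rename_i b z _
      by_cases hb : b ∈ seen
      · exact v1 z (hcl b hb z hbc)
      · exact v4 b ih hb z hbc
  have hiff : ∀ x, x ∈ (pvVisit adj (pvFuel adj order) seen vars [c]).1 ↔ (x ∈ seen ∨ PvReachA adj c x) := by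
    intro x
    constructor
    · intro hx
      rcases pvVisit_subset adj (pvFuel adj order) seen vars [c] x hx with h | ⟨s, hs, hr⟩
      · exact Or.inl h
      · rcases List.mem_singleton.mp hs with rfl
        exact Or.inr hr
    · rintro (h | h)
      · exact v1 x h
      · exact hre x h
  refine ⟨hiff, fun x => ?_⟩
  rw [v2 x]
  constructor
  · rintro (h | ⟨h1, h2⟩)
    · exact Or.inl h
    · rcases (hiff x).mp h1 with h' | h'
      · exact absurd h' h2
      · exact Or.inr ⟨h', h2⟩
  · rintro (h | ⟨h1, h2⟩)
    · exact Or.inl h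
    · exact Or.inr ⟨(hiff x).mpr (Or.inr h1), h2⟩

theorem pvHeadI_mem (l : List (Int × Int)) (h : l ≠ []) : l.headI ∈ l := by
  cases l with
  | nil => exact absurd rfl h
  | cons a t => exact List.mem_cons_self

theorem pvFoldA (V : PySem.Set (Int × Int)) :
    ∀ (rel : List (List (Int × Int) × Int)) (acc : List ((List (Int × Int)) × Int)),
      (rel.foldl (fun acc p =>
        if PySem.Set.inter p.1 V = [] then acc
        else acc ++ [(pvSortedCells (PySem.Set.inter p.1 V), p.2)]) acc)
      = acc ++ (rel.filter (fun p => !(PySem.Set.inter p.1 V == []))).map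
          (fun p => (pvSortedCells (PySem.Set.inter p.1 V), p.2)) := by
  intro rel
  induction rel with
  | nil => intro acc; simp
  | cons p rel ih =>
    intro acc
    rw [List.foldl_cons]
    by_cases hc : PySem.Set.inter p.1 V = []
    · rw [if_pos hc, ih, List.filter_cons_of_neg (by simp [hc])]
    · rw [if_neg hc, ih, List.filter_cons_of_pos (by simp [hc]), List.map_cons, List.append_assoc]
      rfl


-- ---- B-side: incidence DFS facts ----

def PvStepB (inc : PySem.Dict (Int × Int) (List Nat)) (rel : List (List (Int × Int) × Int))
    (x y : Int × Int) : Prop := ∃ i ∈ pvIGet inc x, y ∈ pvCellsOf rel i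

def PvReachB (inc : PySem.Dict (Int × Int) (List Nat)) (rel : List (List (Int × Int) × Int))
    (x y : Int × Int) : Prop := Relation.ReflTransGen (PvStepB inc rel) x y

def pvUnivB (order : List (Int × Int)) (rel : List (List (Int × Int) × Int)) : List (Int × Int) :=
  order ++ (rel.map (fun p => p.1)).flatten

def pvPhiB (order : List (Int × Int)) (rel : List (List (Int × Int) × Int))
    (comp : PySem.Dict (Int × Int) Int) (stack : List (Int × Int)) : Nat :=
  stack.length + ((pvUnivB order rel).filter (fun x => (comp.get? x).isNone)).length * (pvTotB rel + 1)

theorem pvFoldApp_mem {α β : Type} (f : α → List β) :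
    ∀ (l : List α) (init : List β) (x : β),
      x ∈ l.foldl (fun s i => s ++ f i) init ↔ x ∈ init ∨ ∃ i ∈ l, x ∈ f i := by
  intro l
  induction l with
  | nil => intro init x; simp
  | cons a l ih =>
    intro init x
    rw [List.foldl_cons, ih]
    simp only [List.mem_append, List.mem_cons]
    constructor
    · rintro ((h | h) | ⟨i, hi, hx⟩)
      · exact Or.inl h
      · exact Or.inr ⟨a, Or.inl rfl, h⟩
      · exact Or.inr ⟨i, Or.inr hi, hx⟩
    · rintro (h | ⟨i, (rfl | hi), hx⟩)
      · exact Or.inl (Or.inl h)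
      · exact Or.inl (Or.inr hx)
      · exact Or.inr ⟨i, hi, hx⟩

theorem pvFoldApp_len {α β : Type} (f : α → List β) :
    ∀ (l : List α) (init : List β),
      (l.foldl (fun s i => s ++ f i) init).length
        = init.length + (l.map (fun i => (f i).length)).sum := by
  intro l
  induction l with
  | nil => intro init; simp
  | cons a l ih =>
    intro init
    rw [List.foldl_cons, ih, List.length_append, List.map_cons, List.sum_cons]
    omega

theorem pvIsNone_insert (comp : PySem.Dict (Int × Int) Int) (cur : Int × Int) (n : Int)
    (x : Int × Int) :
    ((comp.insert cur n).get? x).isNone = ((comp.get? x).isNone && !(x == cur)) := by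
  rw [PySem.Dict.get?_insert]
  by_cases h : x = cur
  · simp [h]
  · simp [h]

theorem pvLabel_cons_seen (inc : PySem.Dict (Int × Int) (List Nat))
    (rel : List (List (Int × Int) × Int)) (n : Int) (fuel : Nat)
    (comp : PySem.Dict (Int × Int) Int) (cur : Int × Int) (rest : List (Int × Int))
    (h : (comp.get? cur).isSome = true) :
    pvLabel inc rel n (fuel + 1) comp (cur :: rest) = pvLabel inc rel n fuel comp rest := by
  simp only [pvLabel, h, reduceIte]

theorem pvLabel_cons_fresh (inc : PySem.Dict (Int × Int) (List Nat))
    (rel : List (List (Int × Int) × Int)) (n : Int) (fuel : Nat)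
    (comp : PySem.Dict (Int × Int) Int) (cur : Int × Int) (rest : List (Int × Int))
    (h : (comp.get? cur).isSome = false) :
    pvLabel inc rel n (fuel + 1) comp (cur :: rest) =
      pvLabel inc rel n fuel (comp.insert cur n)
        ((pvIGet inc cur).foldl (fun s i =>
          s ++ (pvCellsOf rel i).filter (fun c => ((comp.insert cur n).get? c).isNone)) [] ++ rest) := by
  simp only [pvLabel, h]
  rw [if_neg (by simp)]

theorem pvLabel_spec (inc : PySem.Dict (Int × Int) (List Nat)) (rel : List (List (Int × Int) × Int))
    (n : Int) (order : List (Int × Int))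
    (hidx : ∀ c i, i ∈ pvIGet inc c → i < rel.length)
    (hbound : ∀ c, ((pvIGet inc c).map (fun i => (pvCellsOf rel i).length)).sum ≤ pvTotB rel) :
    ∀ (fuel : Nat) (comp : PySem.Dict (Int × Int) Int) (stack : List (Int × Int)),
      (∀ c ∈ stack, c ∈ pvUnivB order rel) →
      pvPhiB order rel comp stack ≤ fuel →
      (∀ x v, comp.get? x = some v → (pvLabel inc rel n fuel comp stack).get? x = some v) ∧
      (∀ x v, (pvLabel inc rel n fuel comp stack).get? x = some v → comp.get? x = some v ∨ v = n) ∧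
      (∀ c ∈ stack, ((pvLabel inc rel n fuel comp stack).get? c).isSome = true) ∧
      (∀ x, ((pvLabel inc rel n fuel comp stack).get? x).isSome = true → (comp.get? x).isNone = true →
        ∀ y, PvStepB inc rel x y → ((pvLabel inc rel n fuel comp stack).get? y).isSome = true) := by
  intro fuel
  induction fuel with
  | zero =>
    intro comp stack _ hf
    have hstack : stack = [] := by
      unfold pvPhiB at hf
      have := Nat.le_zero.mp hf
      exact List.eq_nil_of_length_eq_zero (by omega)
    subst hstack
    refine ⟨fun x v hx => hx, fun x v hx => Or.inl hx, by simp, ?_⟩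
    intro x hx hnx
    show ∀ _, _
    rw [Option.isNone_iff_eq_none] at hnx
    rw [show pvLabel inc rel n 0 comp [] = comp from rfl, hnx] at hx
    cases hx
  | succ fuel ih =>
    intro comp stack hs hf
    cases stack with
    | nil =>
      refine ⟨fun x v hx => hx, fun x v hx => Or.inl hx, by simp, ?_⟩
      intro x hx hnx
      rw [Option.isNone_iff_eq_none] at hnx
      rw [show pvLabel inc rel n (fuel+1) comp [] = comp from rfl, hnx] at hx
      cases hx
    | cons cur rest =>
      cases hc : (comp.get? cur).isSome with
      | true =>
        rw [pvLabel_cons_seen inc rel n fuel comp cur rest hc]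
        have hf' : pvPhiB order rel comp rest ≤ fuel := by
          unfold pvPhiB at hf ⊢
          simp only [List.length_cons] at hf
          omega
        obtain ⟨i1, i2, i3, i4⟩ := ih comp rest (fun d hd => hs d (List.mem_cons_of_mem cur hd)) hf'
        refine ⟨i1, i2, ?_, i4⟩
        intro d hd
        rcases List.mem_cons.mp hd with rfl | hd'
        · rcases Option.isSome_iff_exists.mp hc with ⟨v, hv⟩
          rw [i1 d v hv]
          rfl
        · exact i3 d hd'
      | false =>
        rw [pvLabel_cons_fresh inc rel n fuel comp cur rest hc]
        have hcn : (comp.get? cur).isNone = true := by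
          cases hcase : comp.get? cur with
          | none => rfl
          | some v => rw [hcase] at hc; cases hc
        have hcurU : cur ∈ pvUnivB order rel := hs cur List.mem_cons_self
        have hPmem : ∀ x, x ∈ (pvIGet inc cur).foldl (fun s i =>
              s ++ (pvCellsOf rel i).filter (fun c => ((comp.insert cur n).get? c).isNone)) []
            ↔ ∃ i ∈ pvIGet inc cur, x ∈ pvCellsOf rel i ∧ (((comp.insert cur n).get? x).isNone = true) := by
          intro x
          have h1 : x ∈ (pvIGet inc cur).foldl (fun s i =>
                s ++ (pvCellsOf rel i).filter (fun c => ((comp.insert cur n).get? c).isNone)) []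
              ↔ x ∈ ([] : List (Int × Int)) ∨ ∃ i ∈ pvIGet inc cur,
                x ∈ (pvCellsOf rel i).filter (fun c => ((comp.insert cur n).get? c).isNone) :=
            pvFoldApp_mem (fun i => (pvCellsOf rel i).filter (fun c => ((comp.insert cur n).get? c).isNone)) _ _ x
          rw [h1]
          simp only [List.not_mem_nil, false_or, List.mem_filter]
        have hPuniv : ∀ x ∈ (pvIGet inc cur).foldl (fun s i =>
              s ++ (pvCellsOf rel i).filter (fun c => ((comp.insert cur n).get? c).isNone)) [],
            x ∈ pvUnivB order rel := by
          intro x hx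
          rcases (hPmem x).mp hx with ⟨i, hi, hxc, _⟩
          have hilen := hidx cur i hi
          unfold pvUnivB
          rw [List.mem_append]
          right
          rw [List.mem_flatten]
          refine ⟨rel[i].1, List.mem_map.mpr ⟨rel[i], List.getElem_mem hilen, rfl⟩, ?_⟩
          unfold pvCellsOf at hxc
          rwa [List.getD_eq_getElem _ _ hilen] at hxc
        have hs' : ∀ d ∈ (pvIGet inc cur).foldl (fun s i =>
              s ++ (pvCellsOf rel i).filter (fun c => ((comp.insert cur n).get? c).isNone)) [] ++ rest,
            d ∈ pvUnivB order rel := by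
          intro d hd
          rcases List.mem_append.mp hd with hd' | hd'
          · exact hPuniv d hd'
          · exact hs d (List.mem_cons_of_mem cur hd')
        have hPlen : ((pvIGet inc cur).foldl (fun s i =>
              s ++ (pvCellsOf rel i).filter (fun c => ((comp.insert cur n).get? c).isNone)) []).length
            ≤ pvTotB rel := by
          have h1 : ((pvIGet inc cur).foldl (fun s i =>
                s ++ (pvCellsOf rel i).filter (fun c => ((comp.insert cur n).get? c).isNone)) []).length
              = ([] : List (Int × Int)).length + ((pvIGet inc cur).map (fun i =>
                  ((pvCellsOf rel i).filter (fun c => ((comp.insert cur n).get? c).isNone)).length)).sum :=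
            pvFoldApp_len _ _ _
          rw [h1]
          simp only [List.length_nil, Nat.zero_add]
          refine le_trans (List.sum_le_sum ?_) (hbound cur)
          intro i _
          exact List.length_filter_le _ _
        have hfilter : (pvUnivB order rel).filter (fun x => ((comp.insert cur n).get? x).isNone)
            = ((pvUnivB order rel).filter (fun x => (comp.get? x).isNone)).filter (fun a => !(a == cur)) := by
          rw [pvFilterFilter]
          apply List.filter_congr
          intro x _
          rw [pvIsNone_insert]
        have hcf : cur ∈ (pvUnivB order rel).filter (fun x => (comp.get? x).isNone) :=
          List.mem_filter.mpr ⟨hcurU, hcn⟩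
        have hlt := pvFilterDropLt _ cur hcf
        have hf' : pvPhiB order rel (comp.insert cur n)
            ((pvIGet inc cur).foldl (fun s i =>
              s ++ (pvCellsOf rel i).filter (fun c => ((comp.insert cur n).get? c).isNone)) [] ++ rest) ≤ fuel := by
          unfold pvPhiB at hf ⊢
          rw [hfilter, List.length_append]
          have hmul : ((((pvUnivB order rel).filter (fun x => (comp.get? x).isNone)).filter (fun a => !(a == cur))).length + 1) * (pvTotB rel + 1)
              ≤ ((pvUnivB order rel).filter (fun x => (comp.get? x).isNone)).length * (pvTotB rel + 1) :=
            Nat.mul_le_mul_right _ hlt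
          rw [Nat.succ_mul] at hmul
          simp only [List.length_cons] at hf
          omega
        obtain ⟨i1, i2, i3, i4⟩ := ih (comp.insert cur n) _ hs' hf'
        refine ⟨?_, ?_, ?_, ?_⟩
        · intro x v hx
          have hxc : x ≠ cur := by
            intro h; subst h
            rw [hx] at hc; cases hc
          apply i1
          rw [PySem.Dict.get?_insert, if_neg hxc]
          exact hx
        · intro x v hx
          rcases i2 x v hx with h | h
          · rw [PySem.Dict.get?_insert] at h
            by_cases hxc : x = cur
            · rw [if_pos hxc] at h
              exact Or.inr (Option.some_inj.mp h).symm
            · rw [if_neg hxc] at h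
              exact Or.inl h
          · exact Or.inr h
        · intro d hd
          rcases List.mem_cons.mp hd with rfl | hd'
          · have : (comp.insert d n).get? d = some n := by
              rw [PySem.Dict.get?_insert, if_pos rfl]
            rw [i1 d n this]
            rfl
          · exact i3 d (List.mem_append.mpr (Or.inr hd'))
        · intro x hx hnx y hstep
          rcases hstep with ⟨i, hi, hy⟩
          by_cases hxc : x = cur
          · subst hxc
            cases hyc : ((comp.insert x n).get? y).isNone with
            | false =>
              have : ((comp.insert x n).get? y).isSome = true := by
                cases hcase : (comp.insert x n).get? y with
                | none => rw [hcase] at hyc; cases hyc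
                | some v => rfl
              rcases Option.isSome_iff_exists.mp this with ⟨v, hv⟩
              rw [i1 y v hv]
              rfl
            | true =>
              apply i3
              apply List.mem_append.mpr
              left
              exact (hPmem y).mpr ⟨i, hi, hy, hyc⟩
          · have hnx' : ((comp.insert cur n).get? x).isNone = true := by
              rw [PySem.Dict.get?_insert, if_neg hxc]
              exact hnx
            exact i4 x hx hnx' y ⟨i, hi, hy⟩

theorem pvLabel_subset (inc : PySem.Dict (Int × Int) (List Nat))
    (rel : List (List (Int × Int) × Int)) (n : Int) :
    ∀ (fuel : Nat) (comp : PySem.Dict (Int × Int) Int) (stack : List (Int × Int)) (x : Int × Int),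
      ((pvLabel inc rel n fuel comp stack).get? x).isSome = true →
      (comp.get? x).isSome = true ∨ ∃ s ∈ stack, PvReachB inc rel s x := by
  intro fuel
  induction fuel with
  | zero => intro comp stack x hx; exact Or.inl hx
  | succ fuel ih =>
    intro comp stack x hx
    cases stack with
    | nil => exact Or.inl hx
    | cons cur rest =>
      cases hc : (comp.get? cur).isSome with
      | true =>
        rw [pvLabel_cons_seen inc rel n fuel comp cur rest hc] at hx
        rcases ih comp rest x hx with h | ⟨s, hs, hr⟩
        · exact Or.inl h
        · exact Or.inr ⟨s, List.mem_cons_of_mem cur hs, hr⟩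
      | false =>
        rw [pvLabel_cons_fresh inc rel n fuel comp cur rest hc] at hx
        rcases ih _ _ x hx with h | ⟨s, hs, hr⟩
        · rw [PySem.Dict.get?_insert] at h
          by_cases hxc : x = cur
          · exact Or.inr ⟨cur, List.mem_cons_self, hxc ▸ Relation.ReflTransGen.refl⟩
          · rw [if_neg hxc] at h
            exact Or.inl h
        · rcases List.mem_append.mp hs with hs' | hs'
          · have h1 : s ∈ ([] : List (Int × Int)) ∨ ∃ i ∈ pvIGet inc cur,
                s ∈ (pvCellsOf rel i).filter (fun c => ((comp.insert cur n).get? c).isNone) :=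
              (pvFoldApp_mem (fun i => (pvCellsOf rel i).filter (fun c => ((comp.insert cur n).get? c).isNone)) _ _ s).mp hs'
            rcases h1 with h1 | ⟨i, hi, hsf⟩
            · cases h1
            · have hstep : PvStepB inc rel cur s := ⟨i, hi, (List.mem_filter.mp hsf).1⟩
              exact Or.inr ⟨cur, List.mem_cons_self, Relation.ReflTransGen.head hstep hr⟩
          · exact Or.inr ⟨s, List.mem_cons_of_mem cur hs', hr⟩

theorem pvPhiB_start_le (order : List (Int × Int)) (rel : List (List (Int × Int) × Int))
    (comp : PySem.Dict (Int × Int) Int) (c : Int × Int) :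
    pvPhiB order rel comp [c] ≤ pvFuelB order rel := by
  unfold pvPhiB pvFuelB
  have h1 : ((pvUnivB order rel).filter (fun x => (comp.get? x).isNone)).length
      ≤ order.length + pvTotB rel := by
    have h2 := List.length_filter_le (fun x => (comp.get? x).isNone) (pvUnivB order rel)
    have h3 : (pvUnivB order rel).length = order.length + ((rel.map (fun p => p.1)).flatten).length := by
      unfold pvUnivB; rw [List.length_append]
    have h4 : ((rel.map (fun p => p.1)).flatten).length = pvTotB rel := by
      rw [List.length_flatten, List.map_map]
      rfl
    omega
  have h5 : ((pvUnivB order rel).filter (fun x => (comp.get? x).isNone)).length * (pvTotB rel + 1)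
      ≤ (order.length + pvTotB rel) * (pvTotB rel + 1) := Nat.mul_le_mul_right _ h1
  have h6 : (order.length + pvTotB rel) * (pvTotB rel + 1)
      ≤ (order.length + pvTotB rel + 1) * (pvTotB rel + 1) :=
    Nat.mul_le_mul_right _ (by omega)
  simp only [List.length_cons, List.length_nil]
  omega

-- full characterisation of one labelling run started on a fresh root, over a closed comp
theorem pvLabel_run (inc : PySem.Dict (Int × Int) (List Nat)) (rel : List (List (Int × Int) × Int))
    (order : List (Int × Int)) (n : Int) (comp : PySem.Dict (Int × Int) Int) (c : Int × Int)
    (hidx : ∀ c' i, i ∈ pvIGet inc c' → i < rel.length)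
    (hbound : ∀ c', ((pvIGet inc c').map (fun i => (pvCellsOf rel i).length)).sum ≤ pvTotB rel)
    (hcu : c ∈ pvUnivB order rel)
    (hcl : ∀ x, (comp.get? x).isSome = true → ∀ y, PvStepB inc rel x y → (comp.get? y).isSome = true) :
    (∀ x, ((pvLabel inc rel n (pvFuelB order rel) comp [c]).get? x).isSome = true ↔
       ((comp.get? x).isSome = true ∨ PvReachB inc rel c x)) ∧
    (∀ x v, comp.get? x = some v → (pvLabel inc rel n (pvFuelB order rel) comp [c]).get? x = some v) ∧
    (∀ x v, (pvLabel inc rel n (pvFuelB order rel) comp [c]).get? x = some v →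
       (comp.get? x).isNone = true → v = n) := by
  obtain ⟨w1, w2, w3, w4⟩ := pvLabel_spec inc rel n order hidx hbound (pvFuelB order rel) comp [c]
    (by intro d hd; rcases List.mem_singleton.mp hd with rfl; exact hcu)
    (pvPhiB_start_le order rel comp c)
  have hre : ∀ x, PvReachB inc rel c x →
      ((pvLabel inc rel n (pvFuelB order rel) comp [c]).get? x).isSome = true := by
    intro x h
    induction h with
    | refl => exact w3 c (List.mem_singleton.mpr rfl)
    | tail _ hbc ih =>
      rename_i b z _
      cases hb : (comp.get? b).isSome with
      | true =>
        rcases Option.isSome_iff_exists.mp (hcl b hb z hbc) with ⟨v, hv⟩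
        rw [w1 z v hv]
        rfl
      | false =>
        have hbn : (comp.get? b).isNone = true := by
          cases hcase : comp.get? b with
          | none => rfl
          | some v => rw [hcase] at hb; cases hb
        exact w4 b ih hbn z hbc
  refine ⟨?_, w1, ?_⟩
  · intro x
    constructor
    · intro hx
      rcases pvLabel_subset inc rel n (pvFuelB order rel) comp [c] x hx with h | ⟨s, hs, hr⟩
      · exact Or.inl h
      · rcases List.mem_singleton.mp hs with rfl
        exact Or.inr hr
    · rintro (h | h)
      · rcases Option.isSome_iff_exists.mp h with ⟨v, hv⟩
        rw [w1 x v hv]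
        rfl
      · exact hre x h
  · intro x v hx hnx
    rcases w2 x v hx with h | h
    · rw [Option.isNone_iff_eq_none] at hnx
      rw [hnx] at h
      cases h
    · exact h


-- ---- B-side: incidence build facts ----

theorem pvInnerInc (idx : Nat) :
    ∀ (cc : List (Int × Int)), cc.Nodup →
      ∀ (d : PySem.Dict (Int × Int) (List Nat)) (x : Int × Int),
        pvIGet (cc.foldl (fun d cell => d.insert cell (d.getD cell [] ++ [idx])) d) x
          = if x ∈ cc then pvIGet d x ++ [idx] else pvIGet d x := by
  intro cc
  induction cc with
  | nil => intro _ d x; simp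
  | cons cell cc ih =>
    intro hnd d x
    have hcell : cell ∉ cc := (List.nodup_cons.mp hnd).1
    have hnd' : cc.Nodup := (List.nodup_cons.mp hnd).2
    rw [List.foldl_cons, ih hnd']
    have hIG : pvIGet (d.insert cell (d.getD cell [] ++ [idx])) x
        = if x = cell then pvIGet d cell ++ [idx] else pvIGet d x := by
      unfold pvIGet
      rw [PySem.Dict.getD_insert]
    by_cases hx : x ∈ cc
    · have hxc : x ≠ cell := fun h => hcell (h ▸ hx)
      rw [if_pos hx, hIG, if_neg hxc, if_pos (List.mem_cons_of_mem cell hx)]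
    · rw [if_neg hx, hIG]
      by_cases hxc : x = cell
      · rw [if_pos hxc, if_pos (List.mem_cons.mpr (Or.inl hxc)), hxc]
      · rw [if_neg hxc, if_neg (by simp [hxc, hx])]

theorem pvIncRel_loop (fr : List (Int × Int)) :
    ∀ (cs : List (List (Int × Int) × Int))
      (st : PySem.Dict (Int × Int) (List Nat) × List (List (Int × Int) × Int)),
      (∀ c i, i ∈ pvIGet st.1 c ↔ ∃ h : i < st.2.length, c ∈ st.2[i].1) →
      (∀ c, ((pvIGet st.1 c).map (fun i => (pvCellsOf st.2 i).length)).sum ≤ pvTotB st.2) →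
      (∀ c i, i ∈ pvIGet (cs.foldl (fun st p =>
          let cc := PySem.Set.inter (PySem.Set.ofList p.1) fr
          if cc = [] then st
          else (cc.foldl (fun d cell => d.insert cell (d.getD cell [] ++ [st.2.length])) st.1,
                st.2 ++ [(cc, p.2)])) st).1 c ↔
        ∃ h : i < (cs.foldl (fun st p =>
          let cc := PySem.Set.inter (PySem.Set.ofList p.1) fr
          if cc = [] then st
          else (cc.foldl (fun d cell => d.insert cell (d.getD cell [] ++ [st.2.length])) st.1,
                st.2 ++ [(cc, p.2)])) st).2.length, c ∈ ((cs.foldl (fun st p =>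
          let cc := PySem.Set.inter (PySem.Set.ofList p.1) fr
          if cc = [] then st
          else (cc.foldl (fun d cell => d.insert cell (d.getD cell [] ++ [st.2.length])) st.1,
                st.2 ++ [(cc, p.2)])) st).2[i]).1) ∧
      (∀ c, ((pvIGet (cs.foldl (fun st p =>
          let cc := PySem.Set.inter (PySem.Set.ofList p.1) fr
          if cc = [] then st
          else (cc.foldl (fun d cell => d.insert cell (d.getD cell [] ++ [st.2.length])) st.1,
                st.2 ++ [(cc, p.2)])) st).1 c).map (fun i => (pvCellsOf (cs.foldl (fun st p =>
          let cc := PySem.Set.inter (PySem.Set.ofList p.1) fr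
          if cc = [] then st
          else (cc.foldl (fun d cell => d.insert cell (d.getD cell [] ++ [st.2.length])) st.1,
                st.2 ++ [(cc, p.2)])) st).2 i).length)).sum ≤ pvTotB (cs.foldl (fun st p =>
          let cc := PySem.Set.inter (PySem.Set.ofList p.1) fr
          if cc = [] then st
          else (cc.foldl (fun d cell => d.insert cell (d.getD cell [] ++ [st.2.length])) st.1,
                st.2 ++ [(cc, p.2)])) st).2) := by
  intro cs
  induction cs with
  | nil => intro st h1 h2; exact ⟨h1, h2⟩
  | cons p cs ih =>
    intro st h1 h2
    rw [List.foldl_cons]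
    by_cases hcc : PySem.Set.inter (PySem.Set.ofList p.1) fr = []
    · simp only [hcc, reduceIte]
      exact ih st h1 h2
    · simp only [if_neg hcc]
      apply ih
      case _ =>
        -- new incidence characterisation
        intro c i
        have hccnd : (PySem.Set.inter (PySem.Set.ofList p.1) fr).Nodup :=
          List.Nodup.filter _ (PySem.Set.nodup_ofList p.1)
        have hIG := pvInnerInc st.2.length (PySem.Set.inter (PySem.Set.ofList p.1) fr) hccnd st.1 c
        show i ∈ pvIGet _ c ↔ _
        rw [hIG]
        have hlen : (st.2 ++ [(PySem.Set.inter (PySem.Set.ofList p.1) fr, p.2)]).length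
            = st.2.length + 1 := by simp
        by_cases hc : c ∈ PySem.Set.inter (PySem.Set.ofList p.1) fr
        · rw [if_pos hc]
          simp only [List.mem_append, List.mem_singleton]
          constructor
          · rintro (hi | rfl)
            · rcases (h1 c i).mp hi with ⟨h, hmem⟩
              refine ⟨by omega, ?_⟩
              rwa [List.getElem_append_left h]
            · refine ⟨by omega, ?_⟩
              rw [List.getElem_concat_length]
              · exact hc
              · rfl
          · rintro ⟨h, hmem⟩
            rw [hlen] at h
            by_cases hi : i < st.2.length
            · rw [List.getElem_append_left hi] at hmem
              exact Or.inl ((h1 c i).mpr ⟨hi, hmem⟩)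
            · have : i = st.2.length := by omega
              exact Or.inr this
        · rw [if_neg hc]
          constructor
          · intro hi
            rcases (h1 c i).mp hi with ⟨h, hmem⟩
            refine ⟨by simp; omega, ?_⟩
            rwa [List.getElem_append_left h]
          · rintro ⟨h, hmem⟩
            rw [hlen] at h
            by_cases hi : i < st.2.length
            · rw [List.getElem_append_left hi] at hmem
              exact (h1 c i).mpr ⟨hi, hmem⟩
            · have heq : i = st.2.length := by omega
              subst heq
              rw [List.getElem_concat_length] at hmem
              · exact absurd hmem hc
              · rfl
      case _ =>
        intro c
        have hccnd : (PySem.Set.inter (PySem.Set.ofList p.1) fr).Nodup :=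
          List.Nodup.filter _ (PySem.Set.nodup_ofList p.1)
        have hIG := pvInnerInc st.2.length (PySem.Set.inter (PySem.Set.ofList p.1) fr) hccnd st.1 c
        show ((pvIGet _ c).map _).sum ≤ _
        rw [hIG]
        have htot : pvTotB (st.2 ++ [(PySem.Set.inter (PySem.Set.ofList p.1) fr, p.2)])
            = pvTotB st.2 + (PySem.Set.inter (PySem.Set.ofList p.1) fr).length := by
          unfold pvTotB
          rw [List.map_append, List.sum_append]
          simp
        have hcells_old : ∀ i ∈ pvIGet st.1 c,
            pvCellsOf (st.2 ++ [(PySem.Set.inter (PySem.Set.ofList p.1) fr, p.2)]) i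
              = pvCellsOf st.2 i := by
          intro i hi
          rcases (h1 c i).mp hi with ⟨h, _⟩
          unfold pvCellsOf
          rw [List.getD_append _ _ _ _ h]
        have hmap_old : (pvIGet st.1 c).map (fun i =>
              (pvCellsOf (st.2 ++ [(PySem.Set.inter (PySem.Set.ofList p.1) fr, p.2)]) i).length)
            = (pvIGet st.1 c).map (fun i => (pvCellsOf st.2 i).length) := by
          apply List.map_congr_left
          intro i hi
          rw [hcells_old i hi]
        have hcells_new : pvCellsOf (st.2 ++ [(PySem.Set.inter (PySem.Set.ofList p.1) fr, p.2)]) st.2.length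
            = PySem.Set.inter (PySem.Set.ofList p.1) fr := by
          unfold pvCellsOf
          rw [List.getD_eq_getElem _ _ (by simp), List.getElem_concat_length]
          rfl
        by_cases hc : c ∈ PySem.Set.inter (PySem.Set.ofList p.1) fr
        · rw [if_pos hc, List.map_append, List.sum_append, hmap_old, htot]
          have h2c := h2 c
          simp only [List.map_cons, List.map_nil, List.sum_cons, List.sum_nil, hcells_new]
          omega
        · rw [if_neg hc, hmap_old, htot]
          have h2c := h2 c
          omega

theorem pvIncRel_spec (fr : List (Int × Int)) (cs : List (List (Int × Int) × Int)) :
    (∀ c i, i ∈ pvIGet (pvIncRel fr cs).1 c ↔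
      ∃ h : i < (pvIncRel fr cs).2.length, c ∈ ((pvIncRel fr cs).2[i]).1) ∧
    (∀ c, ((pvIGet (pvIncRel fr cs).1 c).map
        (fun i => (pvCellsOf (pvIncRel fr cs).2 i).length)).sum ≤ pvTotB (pvIncRel fr cs).2) := by
  unfold pvIncRel
  apply pvIncRel_loop fr cs (PySem.Dict.empty, [])
  · intro c i
    unfold pvIGet
    rw [PySem.Dict.getD_eq_get?_getD, PySem.Dict.get?_empty]
    simp
  · intro c
    unfold pvIGet pvTotB
    rw [PySem.Dict.getD_eq_get?_getD, PySem.Dict.get?_empty]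
    simp

theorem pvIncRel_rel_eq (fr : List (Int × Int)) (cs : List (List (Int × Int) × Int)) :
    (pvIncRel fr cs).2 = (pvAdjRel fr cs).2 := by
  unfold pvIncRel pvAdjRel
  suffices h : ∀ (cs : List (List (Int × Int) × Int))
      (dI : PySem.Dict (Int × Int) (List Nat))
      (dA : PySem.Dict (Int × Int) (PySem.Set (Int × Int)))
      (rel : List (List (Int × Int) × Int)),
      (cs.foldl (fun st p =>
        let cc := PySem.Set.inter (PySem.Set.ofList p.1) fr
        if cc = [] then st
        else (cc.foldl (fun d cell => d.insert cell (d.getD cell [] ++ [st.2.length])) st.1,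
              st.2 ++ [(cc, p.2)])) (dI, rel)).2
      = (cs.foldl (fun st p =>
        let cc := pvInter p.1 fr
        if cc = [] then st
        else (pvAdjStep cc st.1, st.2 ++ [(cc, p.2)])) (dA, rel)).2 by
    exact h cs PySem.Dict.empty PySem.Dict.empty []
  intro cs
  induction cs with
  | nil => intro dI dA rel; rfl
  | cons p cs ih =>
    intro dI dA rel
    rw [List.foldl_cons, List.foldl_cons]
    by_cases hcc : PySem.Set.inter (PySem.Set.ofList p.1) fr = []
    · have hcc' : pvInter p.1 fr = [] := hcc
      simp only [hcc, hcc', reduceIte]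
      exact ih dI dA rel
    · have hcc' : ¬ pvInter p.1 fr = [] := hcc
      simp only [if_neg hcc, if_neg hcc']
      exact ih _ _ _


-- ---- the bridge: A's per-component sets are exactly B's label fibres ----

theorem pvGetConcat {α : Type} (l : List α) (a : α) (h : l.length < (l ++ [a]).length) :
    (l ++ [a])[l.length] = a := by
  rw [List.getElem_concat_length]
  rfl

theorem pvStepBR (inc : PySem.Dict (Int × Int) (List Nat)) (rel : List (List (Int × Int) × Int))
    (hinc : ∀ c i, i ∈ pvIGet inc c ↔ ∃ h : i < rel.length, c ∈ (rel[i]).1) (x y : Int × Int) :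
    PvStepB inc rel x y ↔ PvStepR rel x y := by
  constructor
  · rintro ⟨i, hi, hy⟩
    rcases (hinc x i).mp hi with ⟨h, hx⟩
    refine ⟨rel[i], List.getElem_mem h, hx, ?_⟩
    unfold pvCellsOf at hy
    rwa [List.getD_eq_getElem _ _ h] at hy
  · rintro ⟨p, hp, hx, hy⟩
    rcases List.mem_iff_getElem.mp hp with ⟨i, h, rfl⟩
    refine ⟨i, (hinc x i).mpr ⟨h, hx⟩, ?_⟩
    unfold pvCellsOf
    rwa [List.getD_eq_getElem _ _ h]

theorem pvReachBR (inc : PySem.Dict (Int × Int) (List Nat)) (rel : List (List (Int × Int) × Int))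
    (hinc : ∀ c i, i ∈ pvIGet inc c ↔ ∃ h : i < rel.length, c ∈ (rel[i]).1) (c x : Int × Int) :
    PvReachB inc rel c x ↔ PvReachR rel c x := by
  constructor
  · exact Relation.ReflTransGen.mono (fun a b hab => (pvStepBR inc rel hinc a b).mp hab)
  · exact Relation.ReflTransGen.mono (fun a b hab => (pvStepBR inc rel hinc a b).mpr hab)

def PvInv (adj : PySem.Dict (Int × Int) (PySem.Set (Int × Int)))
    (rel : List (List (Int × Int) × Int))
    (stA : PySem.Set (Int × Int) × List (PySem.Set (Int × Int)))
    (stB : PySem.Dict (Int × Int) Int × Int) : Prop :=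
  (∀ x, x ∈ stA.1 ↔ (stB.1.get? x).isSome = true) ∧
  (stB.2 = (stA.2.length : Int)) ∧
  (∀ (k : Nat) (h : k < stA.2.length) (x : Int × Int),
    stB.1.get? x = some (k : Int) ↔ x ∈ stA.2[k]) ∧
  (∀ x ∈ stA.1, ∀ y ∈ pvAGet adj x, y ∈ stA.1) ∧
  (∀ x, x ∈ stA.1 ↔ ∃ (k : Nat) (h : k < stA.2.length), x ∈ stA.2[k]) ∧
  (∀ (k : Nat) (h : k < stA.2.length), ∀ x ∈ stA.2[k], ∀ y, PvStepR rel x y → y ∈ stA.2[k])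

theorem pvBridge (adj : PySem.Dict (Int × Int) (PySem.Set (Int × Int)))
    (inc : PySem.Dict (Int × Int) (List Nat)) (rel : List (List (Int × Int) × Int))
    (order : List (Int × Int))
    (hadj : ∀ x y, y ∈ pvAGet adj x ↔ PvAdjR rel x y)
    (hinc : ∀ c i, i ∈ pvIGet inc c ↔ ∃ h : i < rel.length, c ∈ (rel[i]).1)
    (hbound : ∀ c, ((pvIGet inc c).map (fun i => (pvCellsOf rel i).length)).sum ≤ pvTotB rel) :
    ∀ (os : List (Int × Int)), (∀ c ∈ os, c ∈ order) →
      ∀ (stA : PySem.Set (Int × Int) × List (PySem.Set (Int × Int)))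
        (stB : PySem.Dict (Int × Int) Int × Int),
      PvInv adj rel stA stB →
      PvInv adj rel
        (os.foldl (fun st cell =>
          if PySem.Set.contains st.1 cell then st
          else
            let r := pvVisit adj (pvFuel adj order) st.1 PySem.Set.empty [cell]
            (r.1, st.2 ++ [r.2])) stA)
        (os.foldl (fun st cell =>
          if (st.1.get? cell).isSome then st
          else (pvLabel inc rel st.2 (pvFuelB order rel) st.1 [cell], st.2 + 1)) stB) ∧
      (∀ x ∈ stA.1, x ∈ (os.foldl (fun st cell =>
          if PySem.Set.contains st.1 cell then st
          else
            let r := pvVisit adj (pvFuel adj order) st.1 PySem.Set.empty [cell]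
            (r.1, st.2 ++ [r.2])) stA).1) ∧
      (∀ c ∈ os, c ∈ (os.foldl (fun st cell =>
          if PySem.Set.contains st.1 cell then st
          else
            let r := pvVisit adj (pvFuel adj order) st.1 PySem.Set.empty [cell]
            (r.1, st.2 ++ [r.2])) stA).1) := by
  have hidx : ∀ c' i, i ∈ pvIGet inc c' → i < rel.length := by
    intro c' i hi
    rcases (hinc c' i).mp hi with ⟨h, -⟩
    exact h
  intro os
  induction os with
  | nil =>
    intro _ stA stB hInv
    exact ⟨hInv, fun x hx => hx, by simp⟩
  | cons c os ih =>
    intro hos stA stB hInv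
    obtain ⟨I1, I2, I3, I4, I5, I7⟩ := hInv
    rw [List.foldl_cons, List.foldl_cons]
    cases hb : (stB.1.get? c).isSome with
    | true =>
      have hAc : PySem.Set.contains stA.1 c = true :=
        (PySem.Set.contains_iff _ _).mpr ((I1 c).mpr hb)
      rw [hAc]
      obtain ⟨j1, j2, j3⟩ := ih (fun d hd => hos d (List.mem_cons_of_mem c hd)) stA stB
        ⟨I1, I2, I3, I4, I5, I7⟩
      refine ⟨j1, j2, ?_⟩
      intro d hd
      rcases List.mem_cons.mp hd with rfl | hd'
      · exact j2 d ((I1 d).mpr hb)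
      · exact j3 d hd'
    | false =>
      have hAc : PySem.Set.contains stA.1 c = false := by
        cases hcase : PySem.Set.contains stA.1 c with
        | false => rfl
        | true =>
          rw [(I1 c).mp ((PySem.Set.contains_iff _ _).mp hcase)] at hb
          cases hb
      rw [hAc]
      simp only [Bool.false_eq_true, if_false]
      have hemp : ∀ x : Int × Int, x ∉ (PySem.Set.empty : PySem.Set (Int × Int)) := by
        intro x h
        simp [PySem.Set.empty] at h
      -- characterise A's run
      obtain ⟨hA1, hA2⟩ := pvVisit_run adj order stA.1 PySem.Set.empty c
        (List.mem_append.mpr (Or.inl (hos c List.mem_cons_self))) I4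
      have hA2' : ∀ x, x ∈ (pvVisit adj (pvFuel adj order) stA.1 PySem.Set.empty [c]).2 ↔
          (PvReachA adj c x ∧ x ∉ stA.1) := by
        intro x
        rw [hA2 x]
        constructor
        · rintro (h | h)
          · exact absurd h (hemp x)
          · exact h
        · exact Or.inr
      -- characterise B's run
      have hclB : ∀ x, (stB.1.get? x).isSome = true →
          ∀ y, PvStepB inc rel x y → (stB.1.get? y).isSome = true := by
        intro x hx y hstep
        have hxA : x ∈ stA.1 := (I1 x).mpr hx
        by_cases hyx : y = x
        · exact hyx ▸ hx
        · have hstepR : PvStepR rel x y := (pvStepBR inc rel hinc x y).mp hstep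
          have hyA : y ∈ stA.1 := I4 x hxA y ((hadj x y).mpr ⟨hyx, hstepR⟩)
          exact (I1 y).mp hyA
      obtain ⟨hB1, hBold, hBnew⟩ := pvLabel_run inc rel order stB.2 stB.1 c hidx hbound
        (List.mem_append.mpr (Or.inl (hos c List.mem_cons_self))) hclB
      have hreach : ∀ x, PvReachA adj c x ↔ PvReachB inc rel c x := by
        intro x
        rw [pvReachAR adj rel hadj c x, pvReachBR inc rel hinc c x]
      have hvlt : ∀ x v, stB.1.get? x = some v →
          ∃ (k : Nat) (h : k < stA.2.length), v = (k : Int) ∧ x ∈ stA.2[k] := by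
        intro x v hv
        have hxA : x ∈ stA.1 := (I1 x).mpr (by rw [hv]; rfl)
        rcases (I5 x).mp hxA with ⟨k, hk, hmem⟩
        have h3 := (I3 k hk x).mpr hmem
        rw [hv] at h3
        exact ⟨k, hk, Option.some_inj.mp h3, hmem⟩
      set r := pvVisit adj (pvFuel adj order) stA.1 PySem.Set.empty [c] with hr
      set rB := pvLabel inc rel stB.2 (pvFuelB order rel) stB.1 [c] with hrB
      have hlen' : (stA.2 ++ [r.2]).length = stA.2.length + 1 := by simp
      -- the new invariant
      have hI1' : ∀ x, x ∈ r.1 ↔ (rB.get? x).isSome = true := by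
        intro x
        rw [hA1 x, hB1 x, I1 x, hreach x]
      have hI2' : stB.2 + 1 = ((stA.2 ++ [r.2]).length : Int) := by
        rw [hlen', I2]
        push_cast
        ring
      have hI3' : ∀ (k : Nat) (h : k < (stA.2 ++ [r.2]).length) (x : Int × Int),
          rB.get? x = some (k : Int) ↔ x ∈ (stA.2 ++ [r.2])[k] := by
        intro k hk x
        by_cases hkl : k < stA.2.length
        · rw [List.getElem_append_left hkl]
          have hiff : rB.get? x = some (k : Int) ↔ stB.1.get? x = some (k : Int) := by
            constructor
            · intro h
              cases hold : (stB.1.get? x).isSome with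
              | true =>
                rcases Option.isSome_iff_exists.mp hold with ⟨v, hv⟩
                have := hBold x v hv
                rw [h] at this
                rw [hv, Option.some_inj.mp this]
              | false =>
                have holdn : (stB.1.get? x).isNone = true := by
                  cases hcase : stB.1.get? x with
                  | none => rfl
                  | some v => rw [hcase] at hold; cases hold
                have := hBnew x (k : Int) h holdn
                rw [I2] at this
                have : k = stA.2.length := by exact_mod_cast this
                omega
            · exact hBold x (k : Int)
          rw [hiff]
          exact I3 k hkl x
        · have hkeq : k = stA.2.length := by
            rw [hlen'] at hk
            omega
          subst hkeq
          rw [pvGetConcat stA.2 r.2 (by simp)]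
          constructor
          · intro h
            have hnold : (stB.1.get? x).isSome = false := by
              cases hold : (stB.1.get? x).isSome with
              | false => rfl
              | true =>
                rcases Option.isSome_iff_exists.mp hold with ⟨v, hv⟩
                rcases hvlt x v hv with ⟨k', hk', rfl, -⟩
                have := hBold x (k' : Int) hv
                rw [h] at this
                have : (stA.2.length : Int) = (k' : Int) := Option.some_inj.mp this
                have : stA.2.length = k' := by exact_mod_cast this
                omega
            have hsome : (rB.get? x).isSome = true := by rw [h]; rfl
            rcases (hB1 x).mp hsome with hold | hreB
            · rw [hold] at hnold; cases hnold
            · refine (hA2' x).mpr ⟨(hreach x).mpr hreB, ?_⟩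
              intro hxA
              rw [(I1 x).mp hxA] at hnold
              cases hnold
          · intro hx
            rcases (hA2' x).mp hx with ⟨hre, hni⟩
            have hnone : (stB.1.get? x).isNone = true := by
              cases hcase : stB.1.get? x with
              | none => rfl
              | some v =>
                exact absurd ((I1 x).mpr (by rw [hcase]; rfl)) hni
            have hsome : (rB.get? x).isSome = true :=
              (hB1 x).mpr (Or.inr ((hreach x).mp hre))
            rcases Option.isSome_iff_exists.mp hsome with ⟨v, hv⟩
            have := hBnew x v hv hnone
            rw [this, I2] at hv
            exact hv
      have hI4' : ∀ x ∈ r.1, ∀ y ∈ pvAGet adj x, y ∈ r.1 := by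
        intro x hx y hy
        rcases (hA1 x).mp hx with h | h
        · exact (hA1 y).mpr (Or.inl (I4 x h y hy))
        · exact (hA1 y).mpr (Or.inr (Relation.ReflTransGen.tail h hy))
      have hI5' : ∀ x, x ∈ r.1 ↔ ∃ (k : Nat) (h : k < (stA.2 ++ [r.2]).length),
          x ∈ (stA.2 ++ [r.2])[k] := by
        intro x
        constructor
        · intro hx
          by_cases hxA : x ∈ stA.1
          · rcases (I5 x).mp hxA with ⟨k, hk, hmem⟩
            refine ⟨k, by rw [hlen']; omega, ?_⟩
            rw [List.getElem_append_left hk]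
            exact hmem
          · rcases (hA1 x).mp hx with h | h
            · exact absurd h hxA
            · refine ⟨stA.2.length, by rw [hlen']; omega, ?_⟩
              rw [pvGetConcat stA.2 r.2 (by simp)]
              exact (hA2' x).mpr ⟨h, hxA⟩
        · rintro ⟨k, hk, hmem⟩
          by_cases hkl : k < stA.2.length
          · rw [List.getElem_append_left hkl] at hmem
            exact (hA1 x).mpr (Or.inl ((I5 x).mpr ⟨k, hkl, hmem⟩))
          · have hkeq : k = stA.2.length := by rw [hlen'] at hk; omega
            subst hkeq
            rw [pvGetConcat stA.2 r.2 (by simp)] at hmem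
            exact (hA1 x).mpr (Or.inr ((hA2' x).mp hmem).1)
      have hI7' : ∀ (k : Nat) (h : k < (stA.2 ++ [r.2]).length),
          ∀ x ∈ (stA.2 ++ [r.2])[k], ∀ y, PvStepR rel x y → y ∈ (stA.2 ++ [r.2])[k] := by
        intro k hk x hx y hstep
        by_cases hkl : k < stA.2.length
        · rw [List.getElem_append_left hkl] at hx ⊢
          exact I7 k hkl x hx y hstep
        · have hkeq : k = stA.2.length := by rw [hlen'] at hk; omega
          subst hkeq
          rw [pvGetConcat stA.2 r.2 (by simp)] at hx ⊢
          rcases (hA2' x).mp hx with ⟨hre, hni⟩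
          by_cases hyx : y = x
          · exact hyx ▸ hx
          · have hstepA : y ∈ pvAGet adj x := (hadj x y).mpr ⟨hyx, hstep⟩
            have hyni : y ∉ stA.1 := by
              intro hy
              have hxy : x ≠ y := fun h => hyx h.symm
              have hstepA' : x ∈ pvAGet adj y :=
                (hadj y x).mpr ⟨hxy, pvStepR_symm rel x y hstep⟩
              exact hni (I4 y hy x hstepA')
            exact (hA2' y).mpr ⟨Relation.ReflTransGen.tail hre hstepA, hyni⟩
      obtain ⟨j1, j2, j3⟩ := ih (fun d hd => hos d (List.mem_cons_of_mem c hd))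
        (r.1, stA.2 ++ [r.2]) (rB, stB.2 + 1) ⟨hI1', hI2', hI3', hI4', hI5', hI7'⟩
      refine ⟨j1, ?_, ?_⟩
      · intro x hx
        exact j2 x ((hA1 x).mpr (Or.inl hx))
      · intro d hd
        rcases List.mem_cons.mp hd with rfl | hd'
        · exact j2 d ((hA1 d).mpr (Or.inr Relation.ReflTransGen.refl))
        · exact j3 d hd'


-- ---- assembly: bucket-routing folds as filters ----

theorem pvGroup_len (comp : PySem.Dict (Int × Int) Int) :
    ∀ (l : List (Int × Int)) (bs : List (List (Int × Int))),
      (l.foldl (fun vs cell => vs.modify (pvCGet comp cell).toNat (fun l => l ++ [cell])) bs).length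
        = bs.length := by
  intro l
  induction l with
  | nil => intro bs; rfl
  | cons c l ih => intro bs; rw [List.foldl_cons, ih, List.length_modify]

theorem pvGroup_get (comp : PySem.Dict (Int × Int) Int) :
    ∀ (l : List (Int × Int)) (bs : List (List (Int × Int))) (j : Nat), j < bs.length →
      (l.foldl (fun vs cell => vs.modify (pvCGet comp cell).toNat (fun l => l ++ [cell])) bs).getD j []
        = bs.getD j [] ++ l.filter (fun c => (pvCGet comp c).toNat == j) := by
  intro l
  induction l with
  | nil => intro bs j hj; simp
  | cons c l ih =>
    intro bs j hj
    rw [List.foldl_cons]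
    rw [ih _ j (by rw [List.length_modify]; exact hj)]
    have hgd : (bs.modify (pvCGet comp c).toNat (fun l => l ++ [c])).getD j []
        = if (pvCGet comp c).toNat = j then bs.getD j [] ++ [c] else bs.getD j [] := by
      have hjm : j < (bs.modify (pvCGet comp c).toNat (fun l => l ++ [c])).length := by
        rw [List.length_modify]; exact hj
      rw [List.getD_eq_getElem _ _ hjm, List.getElem_modify, List.getD_eq_getElem _ _ hj]
    by_cases hc : (pvCGet comp c).toNat = j
    · rw [hgd, if_pos hc, List.filter_cons_of_pos (by simp [hc]), List.append_assoc]
      rfl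
    · rw [hgd, if_neg hc, List.filter_cons_of_neg (by simp [hc])]

theorem pvRoute_len (comp : PySem.Dict (Int × Int) Int) :
    ∀ (rel : List (List (Int × Int) × Int)) (bs : List (List ((List (Int × Int)) × Int))),
      (rel.foldl (fun bs p =>
        bs.modify (pvCGet comp p.1.headI).toNat (fun l => l ++ [(pvSortedCells p.1, p.2)])) bs).length
        = bs.length := by
  intro rel
  induction rel with
  | nil => intro bs; rfl
  | cons p rel ih => intro bs; rw [List.foldl_cons, ih, List.length_modify]

theorem pvRoute_get (comp : PySem.Dict (Int × Int) Int) :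
    ∀ (rel : List (List (Int × Int) × Int)) (bs : List (List ((List (Int × Int)) × Int))) (j : Nat),
      j < bs.length →
      (rel.foldl (fun bs p =>
        bs.modify (pvCGet comp p.1.headI).toNat (fun l => l ++ [(pvSortedCells p.1, p.2)])) bs).getD j []
        = bs.getD j [] ++ (rel.filter (fun p => (pvCGet comp p.1.headI).toNat == j)).map
            (fun p => (pvSortedCells p.1, p.2)) := by
  intro rel
  induction rel with
  | nil => intro bs j hj; simp
  | cons p rel ih =>
    intro bs j hj
    rw [List.foldl_cons]
    rw [ih _ j (by rw [List.length_modify]; exact hj)]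
    have hgd : (bs.modify (pvCGet comp p.1.headI).toNat (fun l => l ++ [(pvSortedCells p.1, p.2)])).getD j []
        = if (pvCGet comp p.1.headI).toNat = j then bs.getD j [] ++ [(pvSortedCells p.1, p.2)]
          else bs.getD j [] := by
      have hjm : j < (bs.modify (pvCGet comp p.1.headI).toNat (fun l => l ++ [(pvSortedCells p.1, p.2)])).length := by
        rw [List.length_modify]; exact hj
      rw [List.getD_eq_getElem _ _ hjm, List.getElem_modify, List.getD_eq_getElem _ _ hj]
    by_cases hc : (pvCGet comp p.1.headI).toNat = j
    · rw [hgd, if_pos hc, List.filter_cons_of_pos (by simp [hc]), List.map_cons, List.append_assoc]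
      rfl
    · rw [hgd, if_neg hc, List.filter_cons_of_neg (by simp [hc])]

theorem split_components_py_eq (frontier : List (Int × Int))
    (constraints : List ((List (Int × Int)) × Int)) :
    split_components_py frontier constraints = split_components_py_alt frontier constraints := by
  by_cases hf : frontier = []
  · simp [split_components_py, split_components_py_alt, hf]
  · simp only [split_components_py, split_components_py_alt, if_neg hf]
    set forder := pvFOrder frontier with hforder
    have hrel : (pvIncRel forder constraints).2
        = (pvAdjRel forder constraints).2 := pvIncRel_rel_eq _ _
    rw [← hrel]
    set ar := pvAdjRel forder constraints with har
    set ir := pvIncRel forder constraints with hird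
    obtain ⟨hinc0, hbound0⟩ := pvIncRel_spec forder constraints
    have hadjI : ∀ x y, y ∈ pvAGet ar.1 x ↔ PvAdjR ir.2 x y := by
      intro x y
      rw [hrel]
      exact pvAdjRel_mem forder constraints x y
    have hrelE : ∀ p ∈ ir.2, p.1 ≠ [] ∧ ∀ x ∈ p.1, x ∈ forder := by
      rw [hrel]
      exact pvAdjRel_rel_entries forder constraints
    have hInv0 : PvInv ar.1 ir.2 (PySem.Set.empty, []) (PySem.Dict.empty, 0) := by
      refine ⟨?_, by simp, ?_, ?_, ?_, ?_⟩
      · intro x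
        simp [PySem.Set.empty, PySem.Dict.get?_empty]
      · intro k h x
        simp at h
      · intro x hx
        simp [PySem.Set.empty] at hx
      · intro x
        constructor
        · intro hx
          simp [PySem.Set.empty] at hx
        · rintro ⟨k, hk, -⟩
          simp at hk
      · intro k h
        simp at h
    obtain ⟨⟨I1, I2, I3, I4, I5, I7⟩, hmono, hcov⟩ :=
      pvBridge ar.1 ir.1 ir.2 forder hadjI hinc0 hbound0 forder (fun c hc => hc)
        (PySem.Set.empty, []) (PySem.Dict.empty, 0) hInv0
    set comps := pvComponents ar.1 forder with hcompsd
    set cn := pvLabelAll ir.1 ir.2 forder with hcnd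
    have I2' : cn.2 = (comps.length : Int) := I2
    have I3' : ∀ (k : Nat) (h : k < comps.length) (x : Int × Int),
        cn.1.get? x = some (k : Int) ↔ x ∈ comps[k] := I3
    have I7' : ∀ (k : Nat) (h : k < comps.length), ∀ x ∈ comps[k],
        ∀ y, PvStepR ir.2 x y → y ∈ comps[k] := I7
    have hcovC : ∀ c ∈ forder, ∃ (k : Nat) (h : k < comps.length), c ∈ comps[k] := by
      intro c hc
      exact (I5 c).mp (hcov c hc)
    have hCGet : ∀ (c : Int × Int) (k : Nat) (h : k < comps.length),
        c ∈ comps[k] → (pvCGet cn.1 c).toNat = k := by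
      intro c k h hm
      have hg := (I3' k h c).mpr hm
      unfold pvCGet
      rw [PySem.Dict.getD_eq_get?_getD, hg]
      simp
    have hdisj : ∀ (a b : Nat) (ha : a < comps.length) (hb : b < comps.length) (x : Int × Int),
        x ∈ comps[a] → x ∈ comps[b] → a = b := by
      intro a b ha hb x hxa hxb
      have h1 := (I3' a ha x).mpr hxa
      have h2 := (I3' b hb x).mpr hxb
      rw [h1] at h2
      have h3 : (a : Int) = (b : Int) := Option.some_inj.mp h2
      exact_mod_cast h3
    have hfacts : ∀ p ∈ ir.2, ∃ (k : Nat) (hk : k < comps.length),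
        (pvCGet cn.1 p.1.headI).toNat = k ∧ ∀ x ∈ p.1, x ∈ comps[k] := by
      intro p hp
      obtain ⟨hne, hsub⟩ := hrelE p hp
      have hhead := pvHeadI_mem p.1 hne
      obtain ⟨k, hk, hm⟩ := hcovC p.1.headI (hsub _ hhead)
      refine ⟨k, hk, hCGet _ k hk hm, ?_⟩
      intro x hx
      exact I7' k hk p.1.headI hm x ⟨p, hp, hhead, hx⟩
    have hcnNat : cn.2.toNat = comps.length := by
      rw [I2']
      exact Int.toNat_natCast _
    have hgl : (pvGroup cn.1 forder cn.2).length = comps.length := by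
      unfold pvGroup
      rw [pvGroup_len, List.length_replicate, hcnNat]
    have hrl : (pvRoute cn.1 ir.2 cn.2).length = comps.length := by
      unfold pvRoute
      rw [pvRoute_len, List.length_replicate, hcnNat]
    apply List.ext_getElem
    · rw [List.length_map, List.length_zip, hgl, hrl, Nat.min_self]
    · intro n h1 h2
      rw [List.length_map] at h1
      rw [List.getElem_map, List.getElem_zip]
      have hnG : n < (pvGroup cn.1 forder cn.2).length := by rw [hgl]; exact h1
      have hnR : n < (pvRoute cn.1 ir.2 cn.2).length := by rw [hrl]; exact h1
      have hnrep : n < (List.replicate cn.2.toNat ([] : List (Int × Int))).length := by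
        rw [List.length_replicate, hcnNat]; exact h1
      have hnrep' : n < (List.replicate cn.2.toNat ([] : List ((List (Int × Int)) × Int))).length := by
        rw [List.length_replicate, hcnNat]; exact h1
      refine Prod.ext ?_ ?_
      · show forder.filter (fun v => PySem.Set.contains comps[n] v) = (pvGroup cn.1 forder cn.2)[n]
        have hGn : (pvGroup cn.1 forder cn.2)[n]
            = forder.filter (fun c => (pvCGet cn.1 c).toNat == n) := by
          rw [← List.getD_eq_getElem _ ([] : List (Int × Int)) hnG]
          unfold pvGroup
          rw [pvGroup_get cn.1 forder _ n hnrep, List.getD_eq_getElem _ _ hnrep,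
            List.getElem_replicate, List.nil_append]
        rw [hGn]
        apply List.filter_congr
        intro c hc
        obtain ⟨k, hk, hm⟩ := hcovC c hc
        have hg := hCGet c k hk hm
        by_cases hkn : k = n
        · subst hkn
          rw [(PySem.Set.contains_iff _ _).mpr hm]
          simp [hg]
        · have hnc : c ∉ comps[n] := fun hcn => hkn (hdisj k n hk h1 c hm hcn)
          have hcf : PySem.Set.contains comps[n] c = false :=
            Bool.eq_false_iff.mpr (fun hh => hnc ((PySem.Set.contains_iff _ _).mp hh))
          rw [hcf, hg]
          simp [hkn]
      · show (ir.2.foldl (fun acc p =>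
            if PySem.Set.inter p.1 comps[n] = [] then acc
            else acc ++ [(pvSortedCells (PySem.Set.inter p.1 comps[n]), p.2)]) [])
          = (pvRoute cn.1 ir.2 cn.2)[n]
        rw [pvFoldA]
        have hRn : (pvRoute cn.1 ir.2 cn.2)[n]
            = (ir.2.filter (fun p => (pvCGet cn.1 p.1.headI).toNat == n)).map
                (fun p => (pvSortedCells p.1, p.2)) := by
          rw [← List.getD_eq_getElem _ ([] : List ((List (Int × Int)) × Int)) hnR]
          unfold pvRoute
          rw [pvRoute_get cn.1 ir.2 _ n hnrep', List.getD_eq_getElem _ _ hnrep',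
            List.getElem_replicate, List.nil_append]
        rw [hRn, List.nil_append]
        have hpeq : ∀ p ∈ ir.2, (!(PySem.Set.inter p.1 comps[n] == ([] : List (Int × Int))))
            = ((pvCGet cn.1 p.1.headI).toNat == n) := by
          intro p hp
          obtain ⟨k, hk, hg, hsubc⟩ := hfacts p hp
          obtain ⟨hne, -⟩ := hrelE p hp
          by_cases hkn : k = n
          · subst hkn
            have hinter : PySem.Set.inter p.1 comps[k] = p.1 := by
              show List.filter _ p.1 = p.1
              apply List.filter_eq_self.mpr
              intro x hx
              exact (PySem.Set.contains_iff _ _).mpr (hsubc x hx)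
            rw [hinter, hg]
            simp [hne]
          · have hinter : PySem.Set.inter p.1 comps[n] = [] := by
              rw [List.eq_nil_iff_forall_not_mem]
              intro x hx
              obtain ⟨hx1, hx2⟩ := (PySem.Set.mem_inter _ _ _).mp hx
              exact hkn (hdisj k n hk h1 x (hsubc x hx1) hx2)
            rw [hinter, hg]
            simp [hkn]
        rw [List.filter_congr hpeq]
        apply List.map_congr_left
        intro p hpf
        obtain ⟨hp, hpb⟩ := List.mem_filter.mp hpf
        obtain ⟨k, hk, hg, hsubc⟩ := hfacts p hp
        have hkn : k = n := by
          rw [hg] at hpb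
          simpa using hpb
        subst hkn
        have hinter : PySem.Set.inter p.1 comps[k] = p.1 := by
          show List.filter _ p.1 = p.1
          apply List.filter_eq_self.mpr
          intro x hx
          exact (PySem.Set.contains_iff _ _).mpr (hsubc x hx)
        rw [hinter]

-- ===== VERDICT (by name: the statement is the Claim_ definition above) =====
theorem split_components_py_spec : Claim_equal_split_components_py := by
  intro frontier constraints _
  unfold Spec_split_components_py
  exact split_components_py_eq frontier constraints
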